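-- pv_equiv track=rewrite | github.com/jiyoungzero/2023-Codingtest-Study | jiyoung풀이/ZB문제/정류장.py | solution
-- ===== SOURCE A (Python) =====
-- from collections import deque
--
-- def solution(city):
--     dx, dy = [0,0,1,-1],[1,-1,0,0]
--     h, w = len(city), len(city[0])
--     que = deque()
--     visited = [[False]*w  for _ in range(h)]
--
--     for i in range(h):
--         for j in range(w):
--             if city[i][j] == 0:
--                 que.append((i, j))
--                 break
--
--     while que:
--         x, y = que.popleft()
--         visited[x][y] = True
--
--         for i in range(4):
--             nx, ny = x+dx[i], y + dy[i]
--             if 0>nx or nx >= h or 0>ny or w<=ny:continue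
--
--             if not visited[nx][ny] and city[nx][ny] == 1:
--                 visited[nx][ny] = True
--                 city[nx][ny] = city[x][y] + 1
--                 que.append((nx, ny))
--
--     return city
-- ===== SOURCE B (Python) =====
-- def solution(city):
--     h, w = len(city), len(city[0])
--     dist = []
--     for row in city:
--         drow = [None] * w
--         for j in range(w):
--             if row[j] == 0:
--                 drow[j] = 0
--                 break
--         dist.append(drow)
--     for _ in range(h * w):
--         changed = False
--         new = []
--         for i in range(h):
--             nrow = []
--             for j in range(w):
--                 d = dist[i][j]
--                 if city[i][j] == 1:
--                     for ni, nj in ((i - 1, j), (i + 1, j), (i, j - 1), (i, j + 1)):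
--                         if 0 <= ni < h and 0 <= nj < w and dist[ni][nj] is not None \
--                                 and (d is None or dist[ni][nj] + 1 < d):
--                             d = dist[ni][nj] + 1
--                 if d != dist[i][j]:
--                     changed = True
--                 nrow.append(d)
--             new.append(nrow)
--         dist = new
--         if not changed:
--             break
--     for i in range(h):
--         for j in range(w):
--             if city[i][j] == 1 and dist[i][j] is not None:
--                 city[i][j] = dist[i][j]
--     return city
-- ===== Notes on version B (the rewrite author's own statement) =====
-- stated objective: alternative
-- what changed: A's label-setting FIFO BFS (queue, visited array, label = parent value + 1) is replaced by a label-correcting fixpoint relaxation (Bellman-Ford/Jacobi): a distance table with None as infinity and 0 at the same first-0-per-row seeds is swept whole-grid, each originally-1 cell relaxing to 1 + min of its 4 neighbours' distances, until a sweep changes nothing; the finite distances are then written back into the grid.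
-- outside the precondition, e.g. on solution([[0, 9, 9], [0, 9]]): A returns [[0, 9, 9], [0, 9]], B raises IndexError
import Mathlib
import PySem

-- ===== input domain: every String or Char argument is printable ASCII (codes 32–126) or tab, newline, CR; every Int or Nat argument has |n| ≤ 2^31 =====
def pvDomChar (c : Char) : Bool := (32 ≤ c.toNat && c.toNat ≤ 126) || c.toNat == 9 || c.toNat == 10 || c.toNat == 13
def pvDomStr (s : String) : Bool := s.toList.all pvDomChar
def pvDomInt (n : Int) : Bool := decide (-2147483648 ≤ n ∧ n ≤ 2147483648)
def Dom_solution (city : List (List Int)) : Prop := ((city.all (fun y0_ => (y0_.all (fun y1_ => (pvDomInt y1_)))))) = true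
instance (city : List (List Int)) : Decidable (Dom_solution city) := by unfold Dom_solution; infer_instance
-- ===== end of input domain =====

-- B replaces A's label-setting FIFO BFS by a label-correcting fixpoint relaxation
-- (Bellman-Ford/Jacobi sweeps over a distance table, then one write-back); same
-- return value, and both mutate `city` in place in Python (the equivalence proved
-- here is about the returned grid).

-- ===== PORT A =====
-- Low-level grid accessors.  Both Pythons index `city` / `visited` / `dist` only
-- behind explicit `0 ≤ · < h/w` bound checks on grids that really have those
-- entries (guaranteed by Pre_solution), so the `getD` defaults are never
-- observable on admitted inputs; `visGet`'s default is `true`, which also serves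
-- the termination measure.  Exact there.
def cellGet (g : List (List Int)) (x y : Int) : Int := (g.getD x.toNat []).getD y.toNat 0

def cellSet (g : List (List Int)) (x y v : Int) : List (List Int) :=
  g.set x.toNat ((g.getD x.toNat []).set y.toNat v)

def visGet (v : List (List Bool)) (x y : Int) : Bool := (v.getD x.toNat []).getD y.toNat true

def visSet (v : List (List Bool)) (x y : Int) : List (List Bool) :=
  v.set x.toNat ((v.getD x.toNat []).set y.toNat true)

-- termination measure helper: number of `false` entries of `visited`
def falseCount (v : List (List Bool)) : Nat := (v.map (fun r => r.count false)).sum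

-- `for i in range(h): for j in range(w): if city[i][j] == 0: que.append((i,j)); break`
def seedRowA (g : List (List Int)) (i : Int) : List Int → List (Int × Int)
  | [] => []
  | j :: js => if cellGet g i j = 0 then [(i, j)] else seedRowA g i js

def seedsA (g : List (List Int)) (h w : Int) : List (Int × Int) :=
  ((PySem.List.pyRange 0 h 1).map (fun i => seedRowA g i (PySem.List.pyRange 0 w 1))).flatten

-- `nx, ny = x + dx[i], y + dy[i]` over the zipped direction arrays
def nbrsA (x y : Int) : List (Int × Int) :=
  (List.zip [0, 0, 1, -1] [1, -1, 0, 0]).map (fun p => (x + p.1, y + p.2))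

-- body of A's inner `for i in range(4)` loop for one neighbour, guards in A's order;
-- state = (city, visited, cells appended to the queue)
def nbStepA (h w x y : Int) (st : List (List Int) × List (List Bool) × List (Int × Int))
    (c : Int × Int) : List (List Int) × List (List Bool) × List (Int × Int) :=
  if c.1 < 0 ∨ h ≤ c.1 ∨ c.2 < 0 ∨ w ≤ c.2 then st
  else if visGet st.2.1 c.1 c.2 = false ∧ cellGet st.1 c.1 c.2 = 1 then
    (cellSet st.1 c.1 c.2 (cellGet st.1 x y + 1), visSet st.2.1 c.1 c.2, st.2.2 ++ [c])
  else st

-- measure lemmas cited by A's port's `decreasing_by` (they must precede the port)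
theorem count_false_set_true_le (l : List Bool) (j : Nat) :
    (l.set j true).count false ≤ l.count false := by
  induction l generalizing j with
  | nil => simp
  | cons a l ih =>
    cases j with
    | zero => cases a <;> simp [List.count_cons]
    | succ j => cases a <;> simp [List.count_cons] <;> exact ih j

theorem count_false_set_true_lt (l : List Bool) (j : Nat) (hj : l.getD j true = false) :
    (l.set j true).count false < l.count false := by
  induction l generalizing j with
  | nil => simp at hj
  | cons a l ih =>
    cases j with
    | zero => simp_all [List.count_cons]
    | succ j =>
      simp only [List.getD, List.getElem?_cons_succ] at hj
      cases a <;> simp [List.count_cons] <;> exact ih j hj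

theorem falseCount_setRow_le : ∀ (v : List (List Bool)) (i : Nat) (r' : List Bool),
    r'.count false ≤ (v.getD i []).count false → falseCount (v.set i r') ≤ falseCount v := by
  intro v
  induction v with
  | nil => intro i r' _; simp [falseCount]
  | cons r v ih =>
    intro i r' hr
    cases i with
    | zero =>
      simp only [List.getD, List.getElem?_cons_zero, Option.getD_some] at hr
      simp [falseCount]; omega
    | succ i =>
      simp only [List.getD, List.getElem?_cons_succ] at hr
      have := ih i r' hr
      simp [falseCount] at this ⊢; omega

theorem falseCount_setRow_lt : ∀ (v : List (List Bool)) (i : Nat) (r' : List Bool),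
    r'.count false < (v.getD i []).count false → falseCount (v.set i r') < falseCount v := by
  intro v
  induction v with
  | nil => intro i r' hr; simp [List.getD] at hr
  | cons r v ih =>
    intro i r' hr
    cases i with
    | zero =>
      simp only [List.getD, List.getElem?_cons_zero, Option.getD_some] at hr
      simp [falseCount]; omega
    | succ i =>
      simp only [List.getD, List.getElem?_cons_succ] at hr
      have := ih i r' hr
      simp [falseCount] at this ⊢; omega

theorem falseCount_visSet_le (v : List (List Bool)) (x y : Int) :
    falseCount (visSet v x y) ≤ falseCount v :=
  falseCount_setRow_le v x.toNat _ (count_false_set_true_le _ y.toNat)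

theorem falseCount_visSet_lt (v : List (List Bool)) (x y : Int)
    (hv : visGet v x y = false) : falseCount (visSet v x y) < falseCount v :=
  falseCount_setRow_lt v x.toNat _ (count_false_set_true_lt _ y.toNat hv)

-- one step of the inner loop never increases  falseCount vis + #appended
def MeasLe (st st' : List (List Int) × List (List Bool) × List (Int × Int)) : Prop :=
  falseCount st'.2.1 + st'.2.2.length ≤ falseCount st.2.1 + st.2.2.length

theorem measLe_foldl {α : Type} (f : (List (List Int) × List (List Bool) × List (Int × Int)) → α →
      (List (List Int) × List (List Bool) × List (Int × Int)))
    (hf : ∀ st c, MeasLe st (f st c)) :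
    ∀ (l : List α) (st : List (List Int) × List (List Bool) × List (Int × Int)),
      MeasLe st (l.foldl f st) := by
  intro l
  induction l with
  | nil => intro st; exact le_rfl
  | cons c l ih =>
    intro st
    have h1 := hf st c
    have h2 := ih (f st c)
    unfold MeasLe at *
    simp only [List.foldl_cons]
    omega

theorem nbStepA_measLe (h w x y : Int) : ∀ st c, MeasLe st (nbStepA h w x y st c) := by
  intro st c
  unfold nbStepA MeasLe
  split
  · exact le_rfl
  · split
    · next hcond =>
      have := falseCount_visSet_lt st.2.1 c.1 c.2 hcond.1
      simp only []
      simp [List.length_append]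
      omega
    · exact le_rfl

def loopA (h w : Int) (que : List (Int × Int)) (g : List (List Int))
    (vis : List (List Bool)) : List (List Int) :=
  match que with
  | [] => g
  | c :: rest =>
    loopA h w
      (rest ++ ((nbrsA c.1 c.2).foldl (nbStepA h w c.1 c.2) (g, visSet vis c.1 c.2, [])).2.2)
      ((nbrsA c.1 c.2).foldl (nbStepA h w c.1 c.2) (g, visSet vis c.1 c.2, [])).1
      ((nbrsA c.1 c.2).foldl (nbStepA h w c.1 c.2) (g, visSet vis c.1 c.2, [])).2.1
termination_by 2 * falseCount vis + que.length
decreasing_by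
  have h1 := measLe_foldl (nbStepA h w c.1 c.2) (nbStepA_measLe h w c.1 c.2) (nbrsA c.1 c.2)
    (g, visSet vis c.1 c.2, [])
  have h2 := falseCount_visSet_le vis c.1 c.2
  unfold MeasLe at h1
  simp only [List.length_append, List.length_cons, List.length_nil] at *
  omega

def solution (city : List (List Int)) : List (List Int) :=
  loopA (city.length : Int) ((city.headD []).length : Int)
    (seedsA city (city.length : Int) ((city.headD []).length : Int)) city
    (List.replicate city.length (List.replicate (city.headD []).length false))

-- ===== PORT B =====
-- `dist[x][y]` of the distance table (None = not yet reached = Lean `none`)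
def dget (D : List (List (Option Int))) (x y : Int) : Option Int :=
  (D.getD x.toNat []).getD y.toNat none

-- `drow = [None]*w; for j in range(w): if row[j] == 0: drow[j] = 0; break`
def firstZero (row : List Int) : List Int → Option Int
  | [] => none
  | j :: js => if row.getD j.toNat 0 = 0 then some j else firstZero row js

def initRow (row : List Int) (w : Int) : List (Option Int) :=
  match firstZero row (PySem.List.pyRange 0 w 1) with
  | none => List.replicate w.toNat (none : Option Int)
  | some j => (List.replicate w.toNat (none : Option Int)).set j.toNat (some 0)

-- `for ni, nj in ((i-1,j),(i+1,j),(i,j-1),(i,j+1))`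
def nbrsJ (i j : Int) : List (Int × Int) := [(i - 1, j), (i + 1, j), (i, j - 1), (i, j + 1)]

-- `if 0 <= ni < h and 0 <= nj < w and dist[ni][nj] is not None and (d is None or dist[ni][nj]+1 < d): d = dist[ni][nj]+1`
def relaxStep (h w : Int) (D : List (List (Option Int))) (d : Option Int) (c : Int × Int) :
    Option Int :=
  if 0 ≤ c.1 ∧ c.1 < h ∧ 0 ≤ c.2 ∧ c.2 < w then
    match dget D c.1 c.2 with
    | none => d
    | some t =>
      match d with
      | none => some (t + 1)
      | some dv => if t + 1 < dv then some (t + 1) else some dv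
  else d

-- `d = dist[i][j]; if city[i][j] == 1: <relax d over the 4 neighbours>`
def newCell (city : List (List Int)) (D : List (List (Option Int))) (h w i j : Int) :
    Option Int :=
  if cellGet city i j = 1 then (nbrsJ i j).foldl (relaxStep h w D) (dget D i j)
  else dget D i j

-- inner `for j in range(w)` of one sweep: builds the new row, tracks `changed`
def sweepRow (city : List (List Int)) (D : List (List (Option Int))) (h w i : Int) :
    List (Option Int) × Bool :=
  (PySem.List.pyRange 0 w 1).foldl
    (fun acc j =>
      (acc.1 ++ [newCell city D h w i j], acc.2 || decide (newCell city D h w i j ≠ dget D i j)))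
    ([], false)

-- one whole sweep `new = …; changed = …`
def sweep (city : List (List Int)) (D : List (List (Option Int))) (h w : Int) :
    List (List (Option Int)) × Bool :=
  (PySem.List.pyRange 0 h 1).foldl
    (fun acc i => (acc.1 ++ [(sweepRow city D h w i).1], acc.2 || (sweepRow city D h w i).2))
    ([], false)

-- `for _ in range(h*w): …; dist = new; if not changed: break`
def jloop (city : List (List Int)) (h w : Int) : Nat → List (List (Option Int)) →
    List (List (Option Int))
  | 0, D => D
  | n + 1, D =>
    if (sweep city D h w).2 = true then jloop city h w n (sweep city D h w).1
    else (sweep city D h w).1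

-- `if city[i][j] == 1 and dist[i][j] is not None: city[i][j] = dist[i][j]`
def wbStep (D : List (List (Option Int))) (i : Int) (g : List (List Int)) (j : Int) :
    List (List Int) :=
  if cellGet g i j = 1 ∧ (dget D i j).isSome then cellSet g i j ((dget D i j).getD 0) else g

def writeback (D : List (List (Option Int))) (g : List (List Int)) (h w : Int) :
    List (List Int) :=
  (PySem.List.pyRange 0 h 1).foldl
    (fun g i => (PySem.List.pyRange 0 w 1).foldl (wbStep D i) g) g

def solution_alt (city : List (List Int)) : List (List Int) :=
  writeback
    (jloop city (city.length : Int) ((city.headD []).length : Int)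
      (city.length * (city.headD []).length)
      (city.map (fun row => initRow row ((city.headD []).length : Int))))
    city (city.length : Int) ((city.headD []).length : Int)

-- ===== PRECONDITION & SPEC =====
-- Pre_ excludes the empty grid and ragged grids whose later rows are shorter than
-- the first row: there both implementations usually raise IndexError, and on the
-- few such grids where A's traversal dodges every short row B's whole-grid sweep
-- still raises, so only crash-prone shapes are excluded.
def Pre_solution (city : List (List Int)) : Prop :=
  city ≠ [] ∧ ∀ r ∈ city, (city.headD []).length ≤ r.length

instance (city : List (List Int)) : Decidable (Pre_solution city) := by
  unfold Pre_solution; infer_instance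

def pvWitness_solution : List (List Int) := [[1, 0, 1], [1, 1, 1], [0, 1, 2]]

def Spec_solution (city : List (List Int)) (out : List (List Int)) : Prop := out = solution_alt city
instance (city : List (List Int)) (out : List (List Int)) : Decidable (Spec_solution city out) := by
  unfold Spec_solution; infer_instance

-- ===== CLAIM (what is proved, stated in full; the proofs are below) =====
def Claim_equal_solution : Prop :=
  ∀ (city : List (List Int)), Dom_solution city → Pre_solution city →
    Spec_solution city (solution city)

-- ===== LEMMAS AND PROOFS =====
-- ---- generic grid get/set lemmas ----
theorem set_oob {α : Type} : ∀ (l : List α) (i : Nat) (a : α), l.length ≤ i → l.set i a = l := by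
  intro l
  induction l with
  | nil => intro i a _; rfl
  | cons x l ih =>
    intro i a hi
    cases i with
    | zero => simp at hi
    | succ i => simp only [List.set_cons_succ]; rw [ih i a (by simpa using hi)]

theorem getD_oob {α : Type} (l : List α) (i : Nat) (d : α) (h : l.length ≤ i) :
    l.getD i d = d := by
  simp [List.getD, List.getElem?_eq_none h]

theorem getD_set_self {α : Type} (l : List α) (i : Nat) (a d : α) (h : i < l.length) :
    (l.set i a).getD i d = a := by
  simp [List.getD, List.getElem?_set_self, h]

theorem getD_set_ne {α : Type} (l : List α) (i j : Nat) (a d : α) (h : i ≠ j) :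
    (l.set i a).getD j d = l.getD j d := by
  simp [List.getD, List.getElem?_set_ne h]

theorem grid_get_set_self {α : Type} (gr : List (List α)) (i j : Nat) (v : α) (dr : List α)
    (dv : α) (hi : i < gr.length) (hj : j < (gr.getD i dr).length) :
    ((gr.set i ((gr.getD i dr).set j v)).getD i dr).getD j dv = v := by
  rw [getD_set_self _ _ _ _ hi, getD_set_self _ _ _ _ hj]

theorem grid_get_set_other {α : Type} (gr : List (List α)) (i j u t : Nat) (v : α)
    (dr : List α) (dv : α) (hne : i ≠ u ∨ j ≠ t) :
    ((gr.set i ((gr.getD i dr).set j v)).getD u dr).getD t dv = (gr.getD u dr).getD t dv := by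
  by_cases hiu : i = u
  · subst hiu
    have hjt : j ≠ t := by tauto
    by_cases hi : i < gr.length
    · rw [getD_set_self _ _ _ _ hi, getD_set_ne _ _ _ _ _ hjt]
    · rw [set_oob _ _ _ (by omega)]
  · rw [getD_set_ne _ _ _ _ _ hiu]

-- ---- the proof-side intermediate program: level-synchronous BFS over frontiers ----
def seedRowB (row : List Int) (i : Int) : List Int → List (Int × Int)
  | [] => []
  | j :: js => if row.getD j.toNat 0 = 0 then [(i, j)] else seedRowB row i js

def seedsB (g : List (List Int)) (w : Int) : List (Int × Int) :=
  ((PySem.List.enumerate g).map (fun p => seedRowB p.2 p.1 (PySem.List.pyRange 0 w 1))).flatten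

def nbrsB (x y : Int) : List (Int × Int) := [(x, y + 1), (x, y - 1), (x + 1, y), (x - 1, y)]

def nbStepB (h w d : Int) (st : List (List Int) × List (List Bool) × List (Int × Int))
    (c : Int × Int) : List (List Int) × List (List Bool) × List (Int × Int) :=
  if (0 ≤ c.1 ∧ c.1 < h ∧ 0 ≤ c.2 ∧ c.2 < w) ∧ visGet st.2.1 c.1 c.2 = false ∧
      cellGet st.1 c.1 c.2 = 1 then
    (cellSet st.1 c.1 c.2 d, visSet st.2.1 c.1 c.2, st.2.2 ++ [c])
  else st

def roundB (h w d : Int) (front : List (Int × Int)) (g : List (List Int))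
    (vis : List (List Bool)) : List (List Int) × List (List Bool) × List (Int × Int) :=
  front.foldl (fun st c => (nbrsB c.1 c.2).foldl (nbStepB h w d) st) (g, vis, [])

theorem nbStepB_measLe (h w d : Int) : ∀ st c, MeasLe st (nbStepB h w d st c) := by
  intro st c
  unfold nbStepB MeasLe
  split
  · next hcond =>
    have := falseCount_visSet_lt st.2.1 c.1 c.2 hcond.2.1
    simp [List.length_append]
    omega
  · exact le_rfl

theorem roundB_measLe (h w d : Int) (front : List (Int × Int)) (g : List (List Int))
    (vis : List (List Bool)) :
    falseCount (roundB h w d front g vis).2.1 + (roundB h w d front g vis).2.2.length ≤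
      falseCount vis := by
  have h := measLe_foldl (α := Int × Int) (fun st c => (nbrsB c.1 c.2).foldl (nbStepB h w d) st)
    (fun st c => measLe_foldl (nbStepB h w d) (nbStepB_measLe h w d) (nbrsB c.1 c.2) st)
    front (g, vis, [])
  unfold MeasLe at h
  simpa [roundB] using h

def loopB (h w : Int) (front : List (Int × Int)) (g : List (List Int))
    (vis : List (List Bool)) (d : Int) : List (List Int) :=
  match front with
  | [] => g
  | _ :: _ =>
    loopB h w (roundB h w (d + 1) front g vis).2.2 (roundB h w (d + 1) front g vis).1
      (roundB h w (d + 1) front g vis).2.1 (d + 1)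
termination_by 2 * falseCount vis + front.length
decreasing_by
  have h := roundB_measLe h w (d + 1) front g vis
  simp only [List.length_cons] at *
  omega

-- ---- simulation of A's FIFO loop by the level-synchronous loop ----
def InB (h w x y : Int) : Prop := 0 ≤ x ∧ x < h ∧ 0 ≤ y ∧ y < w

def RectC (h w : Int) (g : List (List Int)) : Prop :=
  (g.length : Int) = h ∧ ∀ r ∈ g, w ≤ (r.length : Int)

def RectV (h w : Int) (v : List (List Bool)) : Prop :=
  (v.length : Int) = h ∧ ∀ r ∈ v, (r.length : Int) = w

theorem row_len_C (h w : Int) (g : List (List Int)) (a : Int) (hg : RectC h w g)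
    (h0 : 0 ≤ a) (h1 : a < h) : a.toNat < g.length ∧ w ≤ ((g.getD a.toNat []).length : Int) := by
  obtain ⟨hlen, hrow⟩ := hg
  have hia : a.toNat < g.length := by omega
  refine ⟨hia, hrow _ ?_⟩
  rw [List.getD_eq_getElem _ _ hia]
  exact List.getElem_mem hia

theorem row_len_V (h w : Int) (v : List (List Bool)) (a : Int) (hv : RectV h w v)
    (h0 : 0 ≤ a) (h1 : a < h) : a.toNat < v.length ∧ ((v.getD a.toNat []).length : Int) = w := by
  obtain ⟨hlen, hrow⟩ := hv
  have hia : a.toNat < v.length := by omega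
  refine ⟨hia, hrow _ ?_⟩
  rw [List.getD_eq_getElem _ _ hia]
  exact List.getElem_mem hia

theorem cellGet_cellSet_self (h w : Int) (g : List (List Int)) (a b v : Int)
    (hg : RectC h w g) (ha : InB h w a b) : cellGet (cellSet g a b v) a b = v := by
  obtain ⟨h1, h2, h3, h4⟩ := ha
  obtain ⟨hia, hwl⟩ := row_len_C h w g a hg h1 h2
  exact grid_get_set_self _ _ _ _ _ _ hia (by omega)

theorem cellGet_cellSet_other (g : List (List Int)) (a b u t v : Int)
    (hne : a.toNat ≠ u.toNat ∨ b.toNat ≠ t.toNat) :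
    cellGet (cellSet g a b v) u t = cellGet g u t :=
  grid_get_set_other _ _ _ _ _ _ _ _ hne

theorem visGet_visSet_self (h w : Int) (v : List (List Bool)) (a b : Int)
    (hv : RectV h w v) (ha : InB h w a b) : visGet (visSet v a b) a b = true := by
  obtain ⟨h1, h2, h3, h4⟩ := ha
  obtain ⟨hia, hwl⟩ := row_len_V h w v a hv h1 h2
  exact grid_get_set_self _ _ _ _ _ _ hia (by omega)

theorem visGet_visSet_other (v : List (List Bool)) (a b u t : Int)
    (hne : a.toNat ≠ u.toNat ∨ b.toNat ≠ t.toNat) :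
    visGet (visSet v a b) u t = visGet v u t :=
  grid_get_set_other _ _ _ _ _ _ _ _ hne

theorem visGet_visSet_true (v : List (List Bool)) (a b u t : Int)
    (h : visGet v u t = true) : visGet (visSet v a b) u t = true := by
  unfold visGet visSet at *
  by_cases hau : a.toNat = u.toNat
  · rw [← hau] at h ⊢
    by_cases hi : a.toNat < v.length
    · rw [getD_set_self _ _ _ _ hi]
      by_cases ht : t.toNat < ((v.getD a.toNat []).set b.toNat true).length
      · by_cases hbt : b.toNat = t.toNat
        · rw [← hbt] at ht ⊢
          rw [getD_set_self (v.getD a.toNat []) b.toNat true true (by simpa using ht)]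
        · rw [getD_set_ne _ _ _ _ _ hbt]; exact h
      · exact getD_oob _ _ _ (by omega)
    · rw [set_oob _ _ _ (by omega)]; exact h
  · rw [getD_set_ne _ _ _ _ _ hau]; exact h

theorem RectC_cellSet (h w : Int) (g : List (List Int)) (a b v : Int)
    (hg : RectC h w g) (ha : InB h w a b) : RectC h w (cellSet g a b v) := by
  obtain ⟨h1, h2, h3, h4⟩ := ha
  obtain ⟨hia, hwl⟩ := row_len_C h w g a hg h1 h2
  obtain ⟨hlen, hrow⟩ := hg
  constructor
  · rw [cellSet, List.length_set]; exact hlen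
  · intro r hr
    rcases List.mem_or_eq_of_mem_set hr with hr' | hr'
    · exact hrow _ hr'
    · subst hr'; simpa using hwl

theorem RectV_visSet (h w : Int) (v : List (List Bool)) (a b : Int)
    (hv : RectV h w v) (ha : InB h w a b) : RectV h w (visSet v a b) := by
  obtain ⟨h1, h2, h3, h4⟩ := ha
  obtain ⟨hia, hwl⟩ := row_len_V h w v a hv h1 h2
  obtain ⟨hlen, hrow⟩ := hv
  constructor
  · rw [visSet, List.length_set]; exact hlen
  · intro r hr
    rcases List.mem_or_eq_of_mem_set hr with hr' | hr'
    · exact hrow _ hr'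
    · subst hr'; simpa using hwl

def VisAgree (h w : Int) (g : List (List Int)) (va vb : List (List Bool)) : Prop :=
  ∀ x y : Int, InB h w x y → cellGet g x y = 1 → visGet va x y = visGet vb x y

def ParentOK (h w d : Int) (g : List (List Int)) (va vb : List (List Bool))
    (x y : Int) : Prop :=
  InB h w x y ∧ cellGet g x y = d ∧
    (cellGet g x y = 1 → visGet va x y = true ∧ visGet vb x y = true)

def Stable (h w d : Int) (g : List (List Int)) (va vb : List (List Bool))
    (c : Int × Int) : Prop :=
  InB h w c.1 c.2 ∧ cellGet g c.1 c.2 = d ∧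
    visGet va c.1 c.2 = true ∧ visGet vb c.1 c.2 = true

def SimOK (h w d : Int) (g : List (List Int)) (va vb : List (List Bool))
    (A B : List (List Int) × List (List Bool) × List (Int × Int)) : Prop :=
  A.1 = B.1 ∧ A.2.2 = B.2.2 ∧ RectC h w A.1 ∧ RectV h w A.2.1 ∧ RectV h w B.2.1 ∧
  VisAgree h w A.1 A.2.1 B.2.1 ∧
  (∀ u t : Int, ParentOK h w d g va vb u t → ParentOK h w d A.1 A.2.1 B.2.1 u t) ∧
  (∀ e, Stable h w (d + 1) g va vb e → Stable h w (d + 1) A.1 A.2.1 B.2.1 e) ∧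
  (∀ e ∈ A.2.2, Stable h w (d + 1) A.1 A.2.1 B.2.1 e)

theorem simOK_trans (h w d : Int) (g : List (List Int)) (va vb : List (List Bool))
    (A1 B1 A2 B2 : List (List Int) × List (List Bool) × List (Int × Int))
    (s1 : SimOK h w d g va vb A1 B1) (s2 : SimOK h w d A1.1 A1.2.1 B1.2.1 A2 B2) :
    SimOK h w d g va vb A2 B2 := by
  obtain ⟨-, -, -, -, -, -, p1, q1, -⟩ := s1
  obtain ⟨e1, e2, r1, r2, r3, v2, p2, q2, a2⟩ := s2
  exact ⟨e1, e2, r1, r2, r3, v2, fun u t hp => p2 u t (p1 u t hp),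
    fun e he => q2 e (q1 e he), a2⟩

theorem nbrsA_eq (x y : Int) : nbrsA x y = nbrsB x y := by
  simp only [nbrsA, nbrsB, List.zip, List.zipWith, List.map]
  norm_num
  omega

theorem inB_toNat_ne (h w a b u t : Int) (ha : InB h w a b) (hu : InB h w u t)
    (hne : ¬(a = u ∧ b = t)) : a.toNat ≠ u.toNat ∨ b.toNat ≠ t.toNat := by
  obtain ⟨a1, a2, a3, a4⟩ := ha
  obtain ⟨u1, u2, u3, u4⟩ := hu
  by_cases hau : a = u
  · right; subst hau; intro hbt; exact hne ⟨rfl, by omega⟩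
  · left; omega

theorem step_sim (h w d x y : Int) (g : List (List Int)) (va vb : List (List Bool))
    (acc : List (Int × Int)) (c : Int × Int)
    (HC : RectC h w g) (HA : RectV h w va) (HB : RectV h w vb)
    (HV : VisAgree h w g va vb) (HP : ParentOK h w d g va vb x y)
    (Hacc : ∀ e ∈ acc, Stable h w (d + 1) g va vb e) :
    SimOK h w d g va vb (nbStepA h w x y (g, va, acc) c)
      (nbStepB h w (d + 1) (g, vb, acc) c) := by
  obtain ⟨cx, cy⟩ := c
  by_cases hin : InB h w cx cy
  · have hgA : ¬(cx < 0 ∨ h ≤ cx ∨ cy < 0 ∨ w ≤ cy) := by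
      obtain ⟨i1, i2, i3, i4⟩ := hin; omega
    by_cases hfire : visGet va cx cy = false ∧ cellGet g cx cy = 1
    · have hvb : visGet vb cx cy = false := by
        rw [← HV cx cy hin hfire.2]; exact hfire.1
      have hA : nbStepA h w x y (g, va, acc) (cx, cy) =
          (cellSet g cx cy (d + 1), visSet va cx cy, acc ++ [(cx, cy)]) := by
        unfold nbStepA
        rw [if_neg hgA, if_pos (by exact hfire)]
        simp only [HP.2.1]
      have hB : nbStepB h w (d + 1) (g, vb, acc) (cx, cy) =
          (cellSet g cx cy (d + 1), visSet vb cx cy, acc ++ [(cx, cy)]) := by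
        unfold nbStepB
        rw [if_pos (by exact ⟨⟨hin.1, hin.2.1, hin.2.2.1, hin.2.2.2⟩, hvb, hfire.2⟩)]
      rw [hA, hB]
      have hCg' : RectC h w (cellSet g cx cy (d + 1)) := RectC_cellSet h w g cx cy _ HC hin
      have hVa' : RectV h w (visSet va cx cy) := RectV_visSet h w va cx cy HA hin
      have hVb' : RectV h w (visSet vb cx cy) := RectV_visSet h w vb cx cy HB hin
      have hPres : ∀ u t : Int, ParentOK h w d g va vb u t →
          ParentOK h w d (cellSet g cx cy (d + 1)) (visSet va cx cy) (visSet vb cx cy) u t := by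
        intro u t ⟨hinP, hvalP, hvisP⟩
        have hne : ¬(cx = u ∧ cy = t) := by
          rintro ⟨rfl, rfl⟩
          exact absurd (hvisP hfire.2).1 (by simp [hfire.1])
        have hne' := inB_toNat_ne h w cx cy u t hin hinP hne
        have hval' : cellGet (cellSet g cx cy (d + 1)) u t = cellGet g u t :=
          cellGet_cellSet_other g cx cy u t _ hne'
        refine ⟨hinP, by rw [hval']; exact hvalP, ?_⟩
        intro h1
        rw [hval'] at h1
        exact ⟨visGet_visSet_true va cx cy u t (hvisP h1).1,
          visGet_visSet_true vb cx cy u t (hvisP h1).2⟩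
      have hStab : ∀ e, Stable h w (d + 1) g va vb e →
          Stable h w (d + 1) (cellSet g cx cy (d + 1)) (visSet va cx cy) (visSet vb cx cy) e := by
        intro e ⟨hinS, hvalS, hvaS, hvbS⟩
        have hne : ¬(cx = e.1 ∧ cy = e.2) := by
          rintro ⟨rfl, rfl⟩
          exact absurd hvaS (by simp [hfire.1])
        have hne' := inB_toNat_ne h w cx cy e.1 e.2 hin hinS hne
        exact ⟨hinS, by rw [cellGet_cellSet_other g cx cy e.1 e.2 _ hne']; exact hvalS,
          visGet_visSet_true va cx cy e.1 e.2 hvaS, visGet_visSet_true vb cx cy e.1 e.2 hvbS⟩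
      refine ⟨rfl, rfl, hCg', hVa', hVb', ?_, hPres, hStab, ?_⟩
      · intro u t hu hval1
        by_cases heq : cx = u ∧ cy = t
        · obtain ⟨rfl, rfl⟩ := heq
          rw [visGet_visSet_self h w va cx cy HA hin, visGet_visSet_self h w vb cx cy HB hin]
        · have hne' := inB_toNat_ne h w cx cy u t hin hu heq
          rw [cellGet_cellSet_other g cx cy u t _ hne'] at hval1
          rw [visGet_visSet_other va cx cy u t hne', visGet_visSet_other vb cx cy u t hne']
          exact HV u t hu hval1
      · intro e he
        simp only [List.mem_append, List.mem_singleton] at he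
        rcases he with he | he
        · exact hStab e (Hacc e he)
        · subst he
          exact ⟨hin, cellGet_cellSet_self h w g cx cy _ HC hin,
            visGet_visSet_self h w va cx cy HA hin, visGet_visSet_self h w vb cx cy HB hin⟩
    · have hA : nbStepA h w x y (g, va, acc) (cx, cy) = (g, va, acc) := by
        unfold nbStepA
        rw [if_neg hgA, if_neg (by exact hfire)]
      have hB : nbStepB h w (d + 1) (g, vb, acc) (cx, cy) = (g, vb, acc) := by
        unfold nbStepB
        rw [if_neg]
        rintro ⟨hbd, hvb, hval⟩
        exact hfire ⟨by rw [HV cx cy hin hval]; exact hvb, hval⟩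
      rw [hA, hB]
      exact ⟨rfl, rfl, HC, HA, HB, HV, fun u t hp => hp, fun e hs => hs, Hacc⟩
  · have hgA : cx < 0 ∨ h ≤ cx ∨ cy < 0 ∨ w ≤ cy := by
      unfold InB at hin; omega
    have hA : nbStepA h w x y (g, va, acc) (cx, cy) = (g, va, acc) := by
      unfold nbStepA; rw [if_pos hgA]
    have hB : nbStepB h w (d + 1) (g, vb, acc) (cx, cy) = (g, vb, acc) := by
      unfold nbStepB
      rw [if_neg]
      rintro ⟨hbd, -, -⟩
      exact hin ⟨hbd.1, hbd.2.1, hbd.2.2.1, hbd.2.2.2⟩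
    rw [hA, hB]
    exact ⟨rfl, rfl, HC, HA, HB, HV, fun u t hp => hp, fun e hs => hs, Hacc⟩

def cellStepA (h w : Int) (st : List (List Int) × List (List Bool) × List (Int × Int))
    (c : Int × Int) : List (List Int) × List (List Bool) × List (Int × Int) :=
  (((nbrsA c.1 c.2).foldl (nbStepA h w c.1 c.2) (st.1, visSet st.2.1 c.1 c.2, [])).1,
   ((nbrsA c.1 c.2).foldl (nbStepA h w c.1 c.2) (st.1, visSet st.2.1 c.1 c.2, [])).2.1,
   st.2.2 ++ ((nbrsA c.1 c.2).foldl (nbStepA h w c.1 c.2) (st.1, visSet st.2.1 c.1 c.2, [])).2.2)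

theorem fold_sim (h w d x y : Int) : ∀ (ns : List (Int × Int)) (g : List (List Int))
    (va vb : List (List Bool)) (acc : List (Int × Int)),
    RectC h w g → RectV h w va → RectV h w vb → VisAgree h w g va vb →
    ParentOK h w d g va vb x y → (∀ e ∈ acc, Stable h w (d + 1) g va vb e) →
    SimOK h w d g va vb (ns.foldl (nbStepA h w x y) (g, va, acc))
      (ns.foldl (nbStepB h w (d + 1)) (g, vb, acc)) := by
  intro ns
  induction ns with
  | nil =>
    intro g va vb acc HC HA HB HV HP Hacc
    exact ⟨rfl, rfl, HC, HA, HB, HV, fun u t hp => hp, fun e hs => hs, Hacc⟩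
  | cons c ns ih =>
    intro g va vb acc HC HA HB HV HP Hacc
    have s1 := step_sim h w d x y g va vb acc c HC HA HB HV HP Hacc
    obtain ⟨e1, e2, r1, r2, r3, v1, p1, q1, a1⟩ := s1
    simp only [List.foldl_cons]
    have hB1 : nbStepB h w (d + 1) (g, vb, acc) c =
        ((nbStepA h w x y (g, va, acc) c).1,
         (nbStepB h w (d + 1) (g, vb, acc) c).2.1,
         (nbStepA h w x y (g, va, acc) c).2.2) := by
      rw [e1, e2]
    rw [hB1]
    have s2 := ih (nbStepA h w x y (g, va, acc) c).1 (nbStepA h w x y (g, va, acc) c).2.1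
      (nbStepB h w (d + 1) (g, vb, acc) c).2.1 (nbStepA h w x y (g, va, acc) c).2.2
      r1 r2 r3 v1 (p1 x y HP) a1
    exact simOK_trans h w d g va vb _ _ _ _ ⟨e1, e2, r1, r2, r3, v1, p1, q1, a1⟩ s2

theorem foldA_accsplit (h w x y : Int) : ∀ (ns : List (Int × Int)) (g : List (List Int))
    (va : List (List Bool)) (acc : List (Int × Int)),
    ns.foldl (nbStepA h w x y) (g, va, acc) =
      ((ns.foldl (nbStepA h w x y) (g, va, [])).1,
       (ns.foldl (nbStepA h w x y) (g, va, [])).2.1,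
       acc ++ (ns.foldl (nbStepA h w x y) (g, va, [])).2.2) := by
  intro ns
  induction ns with
  | nil => intro g va acc; simp
  | cons c ns ih =>
    intro g va acc
    simp only [List.foldl_cons, nbStepA]
    by_cases h1 : c.1 < 0 ∨ h ≤ c.1 ∨ c.2 < 0 ∨ w ≤ c.2
    · rw [if_pos h1, if_pos h1]
      exact ih g va acc
    · rw [if_neg h1, if_neg h1]
      by_cases h2 : visGet va c.1 c.2 = false ∧ cellGet g c.1 c.2 = 1
      · rw [if_pos h2, if_pos h2]
        rw [ih _ _ (acc ++ [c]), ih _ _ ([] ++ [c])]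
        simp
      · rw [if_neg h2, if_neg h2]
        exact ih g va acc

theorem foldCell_accsplit (h w : Int) : ∀ (q : List (Int × Int)) (g : List (List Int))
    (va : List (List Bool)) (acc : List (Int × Int)),
    q.foldl (cellStepA h w) (g, va, acc) =
      ((q.foldl (cellStepA h w) (g, va, [])).1,
       (q.foldl (cellStepA h w) (g, va, [])).2.1,
       acc ++ (q.foldl (cellStepA h w) (g, va, [])).2.2) := by
  intro q
  induction q with
  | nil => intro g va acc; simp
  | cons c q ih =>
    intro g va acc
    simp only [List.foldl_cons, cellStepA]
    rw [ih _ _ (acc ++ _), ih _ _ ([] ++ _)]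
    simp

theorem cell_sim (h w d : Int) (c : Int × Int) (g : List (List Int))
    (va vb : List (List Bool)) (acc : List (Int × Int))
    (HC : RectC h w g) (HA : RectV h w va) (HB : RectV h w vb)
    (HV : VisAgree h w g va vb) (HPc : ParentOK h w d g va vb c.1 c.2)
    (Hacc : ∀ e ∈ acc, Stable h w (d + 1) g va vb e) :
    SimOK h w d g va vb (cellStepA h w (g, va, acc) c)
      ((nbrsB c.1 c.2).foldl (nbStepB h w (d + 1)) (g, vb, acc)) := by
  have hin : InB h w c.1 c.2 := HPc.1
  have s0 : SimOK h w d g va vb (g, visSet va c.1 c.2, acc) (g, vb, acc) := by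
    refine ⟨rfl, rfl, HC, RectV_visSet h w va c.1 c.2 HA hin, HB, ?_, ?_, ?_, ?_⟩
    · intro u t hu hval1
      by_cases heq : c.1 = u ∧ c.2 = t
      · obtain ⟨he1, he2⟩ := heq
        rw [← he1, ← he2] at hval1 ⊢
        rw [visGet_visSet_self h w va c.1 c.2 HA hin]
        exact (HPc.2.2 hval1).2.symm
      · have hne' := inB_toNat_ne h w c.1 c.2 u t hin hu heq
        rw [visGet_visSet_other va c.1 c.2 u t hne']
        exact HV u t hu hval1
    · intro u t ⟨hinP, hvalP, hvisP⟩
      exact ⟨hinP, hvalP, fun h1 =>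
        ⟨visGet_visSet_true va c.1 c.2 u t (hvisP h1).1, (hvisP h1).2⟩⟩
    · intro e ⟨hinS, hvalS, hvaS, hvbS⟩
      exact ⟨hinS, hvalS, visGet_visSet_true va c.1 c.2 e.1 e.2 hvaS, hvbS⟩
    · intro e he
      obtain ⟨hinS, hvalS, hvaS, hvbS⟩ := Hacc e he
      exact ⟨hinS, hvalS, visGet_visSet_true va c.1 c.2 e.1 e.2 hvaS, hvbS⟩
  obtain ⟨-, -, r0, r2, r3, v0, p0, q0, a0⟩ := s0
  have s1 := fold_sim h w d c.1 c.2 (nbrsA c.1 c.2) g (visSet va c.1 c.2) vb acc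
    r0 r2 r3 v0 (p0 c.1 c.2 HPc) a0
  have hA : cellStepA h w (g, va, acc) c =
      (nbrsA c.1 c.2).foldl (nbStepA h w c.1 c.2) (g, visSet va c.1 c.2, acc) := by
    rw [foldA_accsplit]
    simp only [cellStepA]
  rw [hA, ← nbrsA_eq]
  exact simOK_trans h w d g va vb (g, visSet va c.1 c.2, acc) (g, vb, acc) _ _
    ⟨rfl, rfl, r0, r2, r3, v0, p0, q0, a0⟩ s1

theorem round_sim (h w d : Int) : ∀ (q : List (Int × Int)) (g : List (List Int))
    (va vb : List (List Bool)) (acc : List (Int × Int)),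
    RectC h w g → RectV h w va → RectV h w vb → VisAgree h w g va vb →
    (∀ c ∈ q, ParentOK h w d g va vb c.1 c.2) →
    (∀ e ∈ acc, Stable h w (d + 1) g va vb e) →
    SimOK h w d g va vb (q.foldl (cellStepA h w) (g, va, acc))
      (q.foldl (fun st c => (nbrsB c.1 c.2).foldl (nbStepB h w (d + 1)) st) (g, vb, acc)) := by
  intro q
  induction q with
  | nil =>
    intro g va vb acc HC HA HB HV _ Hacc
    exact ⟨rfl, rfl, HC, HA, HB, HV, fun u t hp => hp, fun e hs => hs, Hacc⟩
  | cons c q ih =>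
    intro g va vb acc HC HA HB HV HQ Hacc
    have s1 := cell_sim h w d c g va vb acc HC HA HB HV (HQ c (by simp)) Hacc
    obtain ⟨e1, e2, r1, r2, r3, v1, p1, q1, a1⟩ := s1
    simp only [List.foldl_cons]
    have hB1 : (nbrsB c.1 c.2).foldl (nbStepB h w (d + 1)) (g, vb, acc) =
        ((cellStepA h w (g, va, acc) c).1,
         ((nbrsB c.1 c.2).foldl (nbStepB h w (d + 1)) (g, vb, acc)).2.1,
         (cellStepA h w (g, va, acc) c).2.2) := by
      rw [e1, e2]
    rw [hB1]
    have s2 := ih (cellStepA h w (g, va, acc) c).1 (cellStepA h w (g, va, acc) c).2.1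
      ((nbrsB c.1 c.2).foldl (nbStepB h w (d + 1)) (g, vb, acc)).2.1
      (cellStepA h w (g, va, acc) c).2.2 r1 r2 r3 v1
      (fun c' hc' => p1 c'.1 c'.2 (HQ c' (by simp [hc'])))
      a1
    exact simOK_trans h w d g va vb _ _ _ _ ⟨e1, e2, r1, r2, r3, v1, p1, q1, a1⟩ s2

theorem loopA_nil (h w : Int) (g : List (List Int)) (va : List (List Bool)) :
    loopA h w [] g va = g := by
  rw [loopA]

theorem loopA_cons (h w : Int) (c : Int × Int) (rest : List (Int × Int))
    (g : List (List Int)) (va : List (List Bool)) :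
    loopA h w (c :: rest) g va =
      loopA h w
        (rest ++ ((nbrsA c.1 c.2).foldl (nbStepA h w c.1 c.2) (g, visSet va c.1 c.2, [])).2.2)
        ((nbrsA c.1 c.2).foldl (nbStepA h w c.1 c.2) (g, visSet va c.1 c.2, [])).1
        ((nbrsA c.1 c.2).foldl (nbStepA h w c.1 c.2) (g, visSet va c.1 c.2, [])).2.1 := by
  rw [loopA]

theorem loopB_nil (h w : Int) (g : List (List Int)) (vb : List (List Bool)) (d : Int) :
    loopB h w [] g vb d = g := by
  rw [loopB]

theorem loopB_cons (h w : Int) (c : Int × Int) (rest : List (Int × Int))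
    (g : List (List Int)) (vb : List (List Bool)) (d : Int) :
    loopB h w (c :: rest) g vb d =
      loopB h w (roundB h w (d + 1) (c :: rest) g vb).2.2
        (roundB h w (d + 1) (c :: rest) g vb).1
        (roundB h w (d + 1) (c :: rest) g vb).2.1 (d + 1) := by
  rw [loopB]

theorem loopA_round (h w : Int) : ∀ (q extra : List (Int × Int)) (g : List (List Int))
    (va : List (List Bool)),
    loopA h w (q ++ extra) g va =
      loopA h w (extra ++ (q.foldl (cellStepA h w) (g, va, [])).2.2)
        (q.foldl (cellStepA h w) (g, va, [])).1
        (q.foldl (cellStepA h w) (g, va, [])).2.1 := by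
  intro q
  induction q with
  | nil => intro extra g va; simp
  | cons c q ih =>
    intro extra g va
    rw [List.cons_append, loopA_cons, List.append_assoc, ih]
    simp only [List.foldl_cons, cellStepA]
    rw [foldCell_accsplit h w q _ _ ([] ++ _)]
    simp [List.append_assoc]

theorem cellStepA_measLe (h w : Int) : ∀ st c, MeasLe st (cellStepA h w st c) := by
  intro st c
  have h1 := measLe_foldl (nbStepA h w c.1 c.2) (nbStepA_measLe h w c.1 c.2) (nbrsA c.1 c.2)
    (st.1, visSet st.2.1 c.1 c.2, [])
  have h2 := falseCount_visSet_le st.2.1 c.1 c.2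
  unfold MeasLe at *
  simp only [cellStepA, List.length_append, List.length_nil] at *
  omega

theorem main_sim (h w : Int) : ∀ (n : Nat) (q : List (Int × Int)) (g : List (List Int))
    (va vb : List (List Bool)) (d : Int),
    2 * falseCount va + q.length ≤ n →
    RectC h w g → RectV h w va → RectV h w vb → VisAgree h w g va vb →
    (∀ c ∈ q, ParentOK h w d g va vb c.1 c.2) →
    loopA h w q g va = loopB h w q g vb d := by
  intro n
  induction n with
  | zero =>
    intro q g va vb d hm _ _ _ _ _
    match q with
    | [] => rw [loopA_nil, loopB_nil]
    | c :: rest => simp at hm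
  | succ n ih =>
    intro q g va vb d hm HC HA HB HV HQ
    match q with
    | [] => rw [loopA_nil, loopB_nil]
    | c :: rest =>
      have hround := round_sim h w d (c :: rest) g va vb [] HC HA HB HV HQ (by simp)
      obtain ⟨e1, e2, r1, r2, r3, v1, -, -, a1⟩ := hround
      have hsplit : loopA h w (c :: rest) g va =
          loopA h w ((c :: rest).foldl (cellStepA h w) (g, va, [])).2.2
            ((c :: rest).foldl (cellStepA h w) (g, va, [])).1
            ((c :: rest).foldl (cellStepA h w) (g, va, [])).2.1 := by
        have := loopA_round h w (c :: rest) [] g va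
        simpa using this
      have hmeas := measLe_foldl (cellStepA h w) (cellStepA_measLe h w) (c :: rest) (g, va, [])
      unfold MeasLe at hmeas
      simp only [List.length_nil] at hmeas
      rw [hsplit, loopB_cons]
      have hBr : roundB h w (d + 1) (c :: rest) g vb =
          (c :: rest).foldl (fun st c => (nbrsB c.1 c.2).foldl (nbStepB h w (d + 1)) st)
            (g, vb, []) := rfl
      rw [hBr, ← e1, ← e2]
      apply ih _ _ _ _ (d + 1) _ r1 r2 r3 v1
      · intro c' hc'
        obtain ⟨hinS, hvalS, hvaS, hvbS⟩ := a1 c' hc'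
        exact ⟨hinS, hvalS, fun _ => ⟨hvaS, hvbS⟩⟩
      · simp only [List.length_cons] at hm
        omega

theorem seedRow_eq (g : List (List Int)) (i : Int) :
    ∀ js : List Int, seedRowA g i js = seedRowB (g.getD i.toNat []) i js := by
  intro js
  induction js with
  | nil => rfl
  | cons j js ih => simp only [seedRowA, seedRowB, cellGet, ih]

theorem seeds_eq (g : List (List Int)) (w : Int) :
    seedsA g (g.length : Int) w = seedsB g w := by
  unfold seedsA seedsB
  rw [PySem.List.enumerate_eq_map_pyRange g [], PySem.List.len_eq, List.map_map]
  congr 1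
  apply List.map_congr_left
  intro i hi
  have h0 : 0 ≤ i := (PySem.List.mem_pyRange_one.mp hi).1
  obtain ⟨m, rfl⟩ : ∃ m : Nat, i = (m : Int) := ⟨i.toNat, (Int.toNat_of_nonneg h0).symm⟩
  simp only [Function.comp, PySem.List.pyGetD_natCast]
  rw [seedRow_eq]
  simp

theorem seedRowA_mem (g : List (List Int)) (i : Int) :
    ∀ (js : List Int) (c : Int × Int), c ∈ seedRowA g i js →
      ∃ j ∈ js, c = (i, j) ∧ cellGet g i j = 0 := by
  intro js
  induction js with
  | nil => intro c hc; simp [seedRowA] at hc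
  | cons j js ih =>
    intro c hc
    rw [seedRowA] at hc
    split at hc
    · next hval =>
      simp only [List.mem_singleton] at hc
      exact ⟨j, by simp, hc, hval⟩
    · obtain ⟨j', hj', hc', hval'⟩ := ih c hc
      exact ⟨j', by simp [hj'], hc', hval'⟩

theorem seedsA_spec (g : List (List Int)) (h w : Int) :
    ∀ c ∈ seedsA g h w, InB h w c.1 c.2 ∧ cellGet g c.1 c.2 = 0 := by
  intro c hc
  unfold seedsA at hc
  simp only [List.mem_flatten, List.mem_map] at hc
  obtain ⟨l, ⟨i, hi, rfl⟩, hcl⟩ := hc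
  obtain ⟨j, hj, rfl, hval⟩ := seedRowA_mem g i _ c hcl
  have hib := PySem.List.mem_pyRange_one.mp hi
  have hjb := PySem.List.mem_pyRange_one.mp hj
  exact ⟨⟨hib.1, hib.2, hjb.1, hjb.2⟩, hval⟩

-- A's port equals the level-synchronous intermediate loop
theorem A_to_loopB (city : List (List Int)) (hpre : Pre_solution city) :
    solution city = loopB (city.length : Int) ((city.headD []).length : Int)
      (seedsB city ((city.headD []).length : Int)) city
      (List.replicate city.length (List.replicate (city.headD []).length false)) 0 := by
  unfold solution
  rw [← seeds_eq]
  apply main_sim (city.length : Int) ((city.headD []).length : Int)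
    (2 * falseCount (List.replicate city.length (List.replicate (city.headD []).length false))
      + (seedsA city (city.length : Int) ((city.headD []).length : Int)).length)
    _ _ _ _ 0 le_rfl
  · exact ⟨rfl, fun r hr => by exact_mod_cast hpre.2 r hr⟩
  · refine ⟨by simp, ?_⟩
    intro r hr
    rw [List.eq_of_mem_replicate hr]
    simp
  · refine ⟨by simp, ?_⟩
    intro r hr
    rw [List.eq_of_mem_replicate hr]
    simp
  · intro x y _ _
    rfl
  · intro c hc
    obtain ⟨hin, hval⟩ := seedsA_spec city _ _ c hc
    refine ⟨hin, hval, ?_⟩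
    intro h1
    rw [hval] at h1
    exact absurd h1 (by decide)

-- ---- Nat-coordinate grid accessors and bridges ----
def EN (g : List (List Int)) (a b : Nat) : Int := (g.getD a []).getD b 0
def VN (v : List (List Bool)) (a b : Nat) : Bool := (v.getD a []).getD b true
def DNt (D : List (List (Option Int))) (a b : Nat) : Option Int := (D.getD a []).getD b none

theorem cellGet_nat (g : List (List Int)) (a b : Nat) : cellGet g (a : Int) (b : Int) = EN g a b := by
  simp [cellGet, EN]

theorem visGet_nat (v : List (List Bool)) (a b : Nat) : visGet v (a : Int) (b : Int) = VN v a b := by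
  simp [visGet, VN]

theorem dget_nat (D : List (List (Option Int))) (a b : Nat) : dget D (a : Int) (b : Int) = DNt D a b := by
  simp [dget, DNt]

theorem EN_cellSet_self (g : List (List Int)) (a b : Nat) (v : Int)
    (ha : a < g.length) (hb : b < (g.getD a []).length) :
    EN (cellSet g (a : Int) (b : Int) v) a b = v := by
  unfold EN cellSet
  simpa using grid_get_set_self g a b v [] 0 ha hb

theorem EN_cellSet_other (g : List (List Int)) (a b a' b' : Nat) (v : Int)
    (hne : ¬(a' = a ∧ b' = b)) :
    EN (cellSet g (a : Int) (b : Int) v) a' b' = EN g a' b' := by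
  unfold EN cellSet
  have : a ≠ a' ∨ b ≠ b' := by tauto
  simpa using grid_get_set_other g a b a' b' v [] 0 (by simpa using this)

theorem VN_visSet_self (v : List (List Bool)) (a b : Nat)
    (ha : a < v.length) (hb : b < (v.getD a []).length) :
    VN (visSet v (a : Int) (b : Int)) a b = true := by
  unfold VN visSet
  simpa using grid_get_set_self v a b true [] true ha hb

theorem VN_visSet_other (v : List (List Bool)) (a b a' b' : Nat)
    (hne : ¬(a' = a ∧ b' = b)) :
    VN (visSet v (a : Int) (b : Int)) a' b' = VN v a' b' := by
  unfold VN visSet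
  have : a ≠ a' ∨ b ≠ b' := by tauto
  simpa using grid_get_set_other v a b a' b' true [] true (by simpa using this)

def sameShape {α β : Type} (g : List (List α)) (g0 : List (List β)) : Prop :=
  g.length = g0.length ∧ ∀ a : Nat, (g.getD a []).length = (g0.getD a []).length

theorem sameShape_refl {α : Type} (g : List (List α)) : sameShape g g := ⟨rfl, fun _ => rfl⟩

theorem sameShape_trans {α β γ : Type} {g1 : List (List α)} {g2 : List (List β)}
    {g3 : List (List γ)} (h1 : sameShape g1 g2) (h2 : sameShape g2 g3) : sameShape g1 g3 :=
  ⟨h1.1.trans h2.1, fun a => (h1.2 a).trans (h2.2 a)⟩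

theorem sameShape_cellSet (g : List (List Int)) (x y v : Int) :
    sameShape (cellSet g x y v) g := by
  constructor
  · simp [cellSet]
  · intro a
    unfold cellSet
    by_cases hx : x.toNat = a
    · subst hx
      by_cases hlt : x.toNat < g.length
      · rw [getD_set_self _ _ _ _ hlt]; simp
      · rw [set_oob _ _ _ (by omega)]
    · rw [getD_set_ne _ _ _ _ _ hx]

theorem sameShape_visSet (v : List (List Bool)) (x y : Int) :
    sameShape (visSet v x y) v := by
  constructor
  · simp [visSet]
  · intro a
    unfold visSet
    by_cases hx : x.toNat = a
    · subst hx
      by_cases hlt : x.toNat < v.length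
      · rw [getD_set_self _ _ _ _ hlt]; simp
      · rw [set_oob _ _ _ (by omega)]
    · rw [getD_set_ne _ _ _ _ _ hx]

-- generic extensionality for grids from shape + pointwise getD equality
theorem grid_ext {α : Type} (d : α) (g g' : List (List α))
    (hl : g.length = g'.length)
    (hr : ∀ a : Nat, (g.getD a []).length = (g'.getD a []).length)
    (he : ∀ a b : Nat, (g.getD a []).getD b d = (g'.getD a []).getD b d) :
    g = g' := by
  apply List.ext_getElem hl
  intro i h1 h2
  apply List.ext_getElem
  · have := hr i
    rwa [List.getD_eq_getElem _ _ h1, List.getD_eq_getElem _ _ h2] at this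
  · intro j hj1 hj2
    have := he i j
    rw [List.getD_eq_getElem _ _ h1, List.getD_eq_getElem _ _ h2] at this
    rwa [List.getD_eq_getElem _ _ hj1, List.getD_eq_getElem _ _ hj2] at this

-- ---- adjacency ----
def adjN (a b a' b' : Nat) : Prop :=
  (a = a' ∧ (b' + 1 = b ∨ b' = b + 1)) ∨ (b = b' ∧ (a' + 1 = a ∨ a' = a + 1))

theorem mem_nbrsB_iff_adjN (a b a' b' : Nat) :
    (((a : Int), (b : Int)) ∈ nbrsB (a' : Int) (b' : Int)) ↔ adjN a b a' b' := by
  simp only [nbrsB, List.mem_cons, List.mem_singleton, List.not_mem_nil, or_false,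
    Prod.mk.injEq, adjN]
  omega

-- a guarded member of B's neighbour list is an in-bounds Nat cell adjacent to (a,b)
theorem mem_nbrsJ_bounds (H W a b : Nat) (c : Int × Int)
    (hc : c ∈ nbrsJ (a : Int) (b : Int))
    (hg : 0 ≤ c.1 ∧ c.1 < (H : Int) ∧ 0 ≤ c.2 ∧ c.2 < (W : Int)) :
    ∃ a' b' : Nat, c = ((a' : Int), (b' : Int)) ∧ a' < H ∧ b' < W ∧ adjN a b a' b' := by
  simp only [nbrsJ, List.mem_cons, List.mem_singleton, List.not_mem_nil, or_false] at hc
  obtain ⟨h1, h2, h3, h4⟩ := hg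
  refine ⟨c.1.toNat, c.2.toNat, ?_, by omega, by omega, ?_⟩
  · rw [Int.toNat_of_nonneg h1, Int.toNat_of_nonneg h3]
  · rcases hc with h | h | h | h <;>
      (rw [h] at h1 h2 h3 h4 ⊢; simp only [adjN]; omega)

theorem adjN_mem_nbrsJ (H W a b a' b' : Nat) (hadj : adjN a b a' b')
    (ha' : a' < H) (hb' : b' < W) :
    (((a' : Int), (b' : Int)) ∈ nbrsJ (a : Int) (b : Int)) ∧
      (0 ≤ ((a' : Int)) ∧ ((a' : Int)) < (H : Int) ∧ 0 ≤ ((b' : Int)) ∧ ((b' : Int)) < (W : Int)) := by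
  constructor
  · simp only [nbrsJ, List.mem_cons, List.mem_singleton, List.not_mem_nil, or_false,
      Prod.mk.injEq, adjN] at hadj ⊢
    omega
  · constructor
    · exact Int.natCast_nonneg a'
    · refine ⟨by exact_mod_cast ha', Int.natCast_nonneg b', by exact_mod_cast hb'⟩

-- ---- pointwise characterization of one level-BFS round ----
-- the cells a round starting from (front, g, vis) discovers
def FireP (H W : Nat) (front : List (Int × Int)) (g : List (List Int))
    (vis : List (List Bool)) (a b : Nat) : Prop :=
  a < H ∧ b < W ∧ VN vis a b = false ∧ EN g a b = 1 ∧
    ∃ f ∈ front, (((a : Int), (b : Int)) ∈ nbrsB f.1 f.2)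

-- intermediate fold states, relative to the base state and an abstract fired set S
def Desc (d' : Int) (g : List (List Int)) (vis : List (List Bool))
    (S : Nat → Nat → Prop) (st : List (List Int) × List (List Bool) × List (Int × Int)) : Prop :=
  sameShape st.1 g ∧ sameShape st.2.1 vis ∧
  (∀ a b : Nat, S a b → EN st.1 a b = d' ∧ VN st.2.1 a b = true) ∧
  (∀ a b : Nat, ¬ S a b → EN st.1 a b = EN g a b ∧ VN st.2.1 a b = VN vis a b) ∧
  (∀ e, e ∈ st.2.2 ↔ ∃ a b : Nat, e = ((a : Int), (b : Int)) ∧ S a b)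

def SOK (H W : Nat) (g : List (List Int)) (vis : List (List Bool))
    (S : Nat → Nat → Prop) : Prop :=
  ∀ a b : Nat, S a b → a < H ∧ b < W ∧ VN vis a b = false ∧ EN g a b = 1

theorem desc_congr (d' : Int) (g : List (List Int)) (vis : List (List Bool))
    (S T : Nat → Nat → Prop) (st : List (List Int) × List (List Bool) × List (Int × Int))
    (hST : ∀ a b, S a b ↔ T a b) (h : Desc d' g vis S st) : Desc d' g vis T st := by
  obtain ⟨h1, h2, h3, h4, h5⟩ := h
  refine ⟨h1, h2, fun a b hT => h3 a b ((hST a b).mpr hT),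
    fun a b hT => h4 a b (fun hS => hT ((hST a b).mp hS)), fun e => (h5 e).trans ?_⟩
  constructor
  · rintro ⟨a, b, rfl, hs⟩; exact ⟨a, b, rfl, (hST a b).mp hs⟩
  · rintro ⟨a, b, rfl, hs⟩; exact ⟨a, b, rfl, (hST a b).mpr hs⟩

theorem sok_congr (H W : Nat) (g : List (List Int)) (vis : List (List Bool))
    (S T : Nat → Nat → Prop) (hST : ∀ a b, T a b → S a b) (h : SOK H W g vis S) :
    SOK H W g vis T := fun a b hT => h a b (hST a b hT)

theorem desc_step (H W : Nat) (d' : Int) (g : List (List Int)) (vis : List (List Bool))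
    (HgL : H ≤ g.length) (Hg : ∀ a, a < H → W ≤ (g.getD a []).length)
    (HvL : H ≤ vis.length) (Hv : ∀ a, a < H → W ≤ (vis.getD a []).length)
    (S : Nat → Nat → Prop) (st : List (List Int) × List (List Bool) × List (Int × Int))
    (c : Int × Int) (hS : SOK H W g vis S) (hD : Desc d' g vis S st) :
    Desc d' g vis
      (fun a b => S a b ∨ ((c.1 = (a : Int) ∧ c.2 = (b : Int)) ∧ a < H ∧ b < W ∧
        VN vis a b = false ∧ EN g a b = 1))
      (nbStepB (H : Int) (W : Int) d' st c) ∧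
    SOK H W g vis
      (fun a b => S a b ∨ ((c.1 = (a : Int) ∧ c.2 = (b : Int)) ∧ a < H ∧ b < W ∧
        VN vis a b = false ∧ EN g a b = 1)) := by
  obtain ⟨h1, h2, h3, h4, h5⟩ := hD
  have hsok : SOK H W g vis (fun a b => S a b ∨ ((c.1 = (a : Int) ∧ c.2 = (b : Int)) ∧
      a < H ∧ b < W ∧ VN vis a b = false ∧ EN g a b = 1)) := by
    intro a b hab
    rcases hab with hab | ⟨_, hab⟩
    · exact hS a b hab
    · exact hab
  refine ⟨?_, hsok⟩
  unfold nbStepB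
  by_cases hcond : (0 ≤ c.1 ∧ c.1 < (H : Int) ∧ 0 ≤ c.2 ∧ c.2 < (W : Int)) ∧
      visGet st.2.1 c.1 c.2 = false ∧ cellGet st.1 c.1 c.2 = 1
  · rw [if_pos hcond]
    obtain ⟨⟨hg1, hg2, hg3, hg4⟩, hvisf, hcell1⟩ := hcond
    have hc1 : c.1 = (c.1.toNat : Int) := (Int.toNat_of_nonneg hg1).symm
    have hc2 : c.2 = (c.2.toNat : Int) := (Int.toNat_of_nonneg hg3).symm
    set a₀ := c.1.toNat
    set b₀ := c.2.toNat
    have haH : a₀ < H := by omega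
    have hbW : b₀ < W := by omega
    rw [hc1, hc2, visGet_nat] at hvisf
    rw [hc1, hc2, cellGet_nat] at hcell1
    have hnS : ¬ S a₀ b₀ := fun hs => by
      have := (h3 a₀ b₀ hs).2
      rw [this] at hvisf; simp at hvisf
    have hbase := h4 a₀ b₀ hnS
    have hvf : VN vis a₀ b₀ = false := by rw [← hbase.2]; exact hvisf
    have hef : EN g a₀ b₀ = 1 := by rw [← hbase.1]; exact hcell1
    have hstL : a₀ < st.1.length := by rw [h1.1]; omega
    have hstR : b₀ < (st.1.getD a₀ []).length := by rw [h1.2 a₀]; have := Hg a₀ haH; omega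
    have hvtL : a₀ < st.2.1.length := by rw [h2.1]; omega
    have hvtR : b₀ < (st.2.1.getD a₀ []).length := by
      rw [h2.2 a₀]; have := Hv a₀ haH; omega
    refine ⟨sameShape_trans (by rw [hc1, hc2]; exact sameShape_cellSet _ _ _ _) h1,
      sameShape_trans (by rw [hc1, hc2]; exact sameShape_visSet _ _ _) h2, ?_, ?_, ?_⟩
    · intro a b hab
      by_cases heq : a = a₀ ∧ b = b₀
      · obtain ⟨rfl, rfl⟩ := heq
        rw [hc1, hc2]
        exact ⟨EN_cellSet_self st.1 a₀ b₀ d' hstL hstR, VN_visSet_self st.2.1 a₀ b₀ hvtL hvtR⟩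
      · have hab' : S a b := by
          rcases hab with hab | ⟨⟨hca, hcb⟩, _⟩
          · exact hab
          · exfalso; apply heq
            constructor
            · have : ((a₀ : Nat) : Int) = (a : Int) := by rw [← hc1]; exact hca
              omega
            · have : ((b₀ : Nat) : Int) = (b : Int) := by rw [← hc2]; exact hcb
              omega
        rw [hc1, hc2, EN_cellSet_other st.1 a₀ b₀ a b d' heq,
          VN_visSet_other st.2.1 a₀ b₀ a b heq]
        exact h3 a b hab'
    · intro a b hab
      have hnSab : ¬ S a b := fun hs => hab (Or.inl hs)
      have heq : ¬(a = a₀ ∧ b = b₀) := by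
        rintro ⟨rfl, rfl⟩
        exact hab (Or.inr ⟨⟨hc1, hc2⟩, haH, hbW, hvf, hef⟩)
      rw [hc1, hc2, EN_cellSet_other st.1 a₀ b₀ a b d' heq,
        VN_visSet_other st.2.1 a₀ b₀ a b heq]
      exact h4 a b hnSab
    · intro e
      simp only [List.mem_append, List.mem_singleton]
      constructor
      · rintro (he | rfl)
        · obtain ⟨a, b, rfl, hs⟩ := (h5 e).mp he
          exact ⟨a, b, rfl, Or.inl hs⟩
        · refine ⟨a₀, b₀, ?_, Or.inr ⟨⟨hc1, hc2⟩, haH, hbW, hvf, hef⟩⟩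
          exact Prod.ext hc1 hc2
      · rintro ⟨a, b, rfl, hs | ⟨⟨hca, hcb⟩, _⟩⟩
        · exact Or.inl ((h5 _).mpr ⟨a, b, rfl, hs⟩)
        · right
          exact (Prod.ext hca hcb).symm
  · rw [if_neg hcond]
    apply desc_congr d' g vis S _ st _ ⟨h1, h2, h3, h4, h5⟩
    intro a b
    constructor
    · exact Or.inl
    · rintro (hs | ⟨⟨hca, hcb⟩, haH, hbW, hvf, hef⟩)
      · exact hs
      · by_cases hs : S a b
        · exact hs
        · exfalso
          apply hcond
          have hbase := h4 a b hs
          refine ⟨⟨?_, ?_, ?_, ?_⟩, ?_, ?_⟩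
          · rw [hca]; exact Int.natCast_nonneg a
          · rw [hca]; exact_mod_cast haH
          · rw [hcb]; exact Int.natCast_nonneg b
          · rw [hcb]; exact_mod_cast hbW
          · rw [hca, hcb, visGet_nat, hbase.2]; exact hvf
          · rw [hca, hcb, cellGet_nat, hbase.1]; exact hef

theorem desc_fold (H W : Nat) (d' : Int) (g : List (List Int)) (vis : List (List Bool))
    (HgL : H ≤ g.length) (Hg : ∀ a, a < H → W ≤ (g.getD a []).length)
    (HvL : H ≤ vis.length) (Hv : ∀ a, a < H → W ≤ (vis.getD a []).length) :
    ∀ (cs : List (Int × Int)) (S : Nat → Nat → Prop)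
      (st : List (List Int) × List (List Bool) × List (Int × Int)),
      SOK H W g vis S → Desc d' g vis S st →
      Desc d' g vis
        (fun a b => S a b ∨ (((a : Int), (b : Int)) ∈ cs ∧ a < H ∧ b < W ∧
          VN vis a b = false ∧ EN g a b = 1))
        (cs.foldl (nbStepB (H : Int) (W : Int) d') st) ∧
      SOK H W g vis
        (fun a b => S a b ∨ (((a : Int), (b : Int)) ∈ cs ∧ a < H ∧ b < W ∧
          VN vis a b = false ∧ EN g a b = 1)) := by
  intro cs
  induction cs with
  | nil =>
    intro S st hS hD
    constructor
    · apply desc_congr d' g vis S _ st _ hD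
      intro a b
      simp
    · apply sok_congr H W g vis S _ _ hS
      intro a b
      simp
  | cons c cs ih =>
    intro S st hS hD
    have hstep := desc_step H W d' g vis HgL Hg HvL Hv S st c hS hD
    obtain ⟨hd1, hs1⟩ := hstep
    have := ih _ _ hs1 hd1
    obtain ⟨hd2, hs2⟩ := this
    simp only [List.foldl_cons]
    have hiff : ∀ a b : Nat,
        ((S a b ∨ ((c.1 = (a : Int) ∧ c.2 = (b : Int)) ∧ a < H ∧ b < W ∧
          VN vis a b = false ∧ EN g a b = 1)) ∨ (((a : Int), (b : Int)) ∈ cs ∧ a < H ∧ b < W ∧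
          VN vis a b = false ∧ EN g a b = 1)) ↔
        (S a b ∨ (((a : Int), (b : Int)) ∈ c :: cs ∧ a < H ∧ b < W ∧
          VN vis a b = false ∧ EN g a b = 1)) := by
      intro a b
      simp only [List.mem_cons]
      constructor
      · rintro ((hs | ⟨⟨hca, hcb⟩, hrest⟩) | ⟨hmem, hrest⟩)
        · exact Or.inl hs
        · exact Or.inr ⟨Or.inl (Prod.ext hca hcb).symm, hrest⟩
        · exact Or.inr ⟨Or.inr hmem, hrest⟩
      · rintro (hs | ⟨hmem | hmem, hrest⟩)
        · exact Or.inl (Or.inl hs)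
        · exact Or.inl (Or.inr ⟨⟨congrArg Prod.fst hmem.symm, congrArg Prod.snd hmem.symm⟩, hrest⟩)
        · exact Or.inr ⟨hmem, hrest⟩
    exact ⟨desc_congr _ _ _ _ _ _ hiff hd2, sok_congr _ _ _ _ _ _ (fun a b h => (hiff a b).mpr h) hs2⟩

-- the full round: the final state is the base state with exactly the FireP cells
-- written to level d', marked visited, and collected
theorem roundB_desc (H W : Nat) (d' : Int) (g : List (List Int)) (vis : List (List Bool))
    (HgL : H ≤ g.length) (Hg : ∀ a, a < H → W ≤ (g.getD a []).length)
    (HvL : H ≤ vis.length) (Hv : ∀ a, a < H → W ≤ (vis.getD a []).length)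
    (front : List (Int × Int)) :
    Desc d' g vis (FireP H W front g vis) (roundB (H : Int) (W : Int) d' front g vis) := by
  suffices h : ∀ (fr : List (Int × Int)) (S : Nat → Nat → Prop)
      (st : List (List Int) × List (List Bool) × List (Int × Int)),
      SOK H W g vis S → Desc d' g vis S st →
      Desc d' g vis
        (fun a b => S a b ∨ (a < H ∧ b < W ∧ VN vis a b = false ∧ EN g a b = 1 ∧
          ∃ f ∈ fr, (((a : Int), (b : Int)) ∈ nbrsB f.1 f.2)))
        (fr.foldl (fun st c => (nbrsB c.1 c.2).foldl (nbStepB (H : Int) (W : Int) d') st) st) by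
    have h0 := h front (fun _ _ => False) (g, vis, [])
      (fun a b hab => absurd hab not_false)
      ⟨sameShape_refl g, sameShape_refl vis, fun a b hab => absurd hab not_false,
        fun a b _ => ⟨rfl, rfl⟩, by simp⟩
    apply desc_congr _ _ _ _ _ _ _ h0
    intro a b
    unfold FireP
    tauto
  intro fr
  induction fr with
  | nil =>
    intro S st hS hD
    apply desc_congr d' g vis S _ st _ hD
    intro a b
    simp
  | cons f fr ih =>
    intro S st hS hD
    obtain ⟨hd1, hs1⟩ := desc_fold H W d' g vis HgL Hg HvL Hv (nbrsB f.1 f.2) S st hS hD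
    have := ih _ _ hs1 hd1
    simp only [List.foldl_cons]
    apply desc_congr _ _ _ _ _ _ _ this
    intro a b
    simp only [List.mem_cons]
    constructor
    · rintro ((hs | ⟨hmem, h1, h2, h3, h4⟩) | ⟨h1, h2, h3, h4, f', hf', hmem⟩)
      · exact Or.inl hs
      · exact Or.inr ⟨h1, h2, h3, h4, f, Or.inl rfl, hmem⟩
      · exact Or.inr ⟨h1, h2, h3, h4, f', Or.inr hf', hmem⟩
    · rintro (hs | ⟨h1, h2, h3, h4, f', hf' | hf', hmem⟩)
      · exact Or.inl (Or.inl hs)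
      · subst hf'; exact Or.inl (Or.inr ⟨hmem, h1, h2, h3, h4⟩)
      · exact Or.inr ⟨h1, h2, h3, h4, f', hf', hmem⟩

-- ---- pointwise characterization of one Jacobi sweep ----
theorem foldl_snoc_or {α β : Type} (f : α → β) (p : α → Bool) :
    ∀ (xs : List α) (l0 : List β) (b0 : Bool),
      xs.foldl (fun acc x => (acc.1 ++ [f x], acc.2 || p x)) (l0, b0) =
        (l0 ++ xs.map f, b0 || xs.any p) := by
  intro xs
  induction xs with
  | nil => intro l0 b0; simp
  | cons x xs ih =>
    intro l0 b0
    simp only [List.foldl_cons, ih, List.map_cons, List.any_cons]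
    simp [Bool.or_assoc]

theorem pyRange0_natCast (n : Nat) :
    PySem.List.pyRange 0 (n : Int) 1 = (List.range n).map (fun k : Nat => (k : Int)) :=
  PySem.List.pyRange_zero_natCast n

theorem map_range_getD {α : Type} (n : Nat) (f : Nat → α) (a : Nat) (d : α) (h : a < n) :
    ((List.range n).map f).getD a d = f a := by
  simp [List.getD, List.getElem?_map, List.getElem?_range, h]

theorem sweepRow_eq (city : List (List Int)) (D : List (List (Option Int))) (h w i : Int) :
    sweepRow city D h w i =
      ((PySem.List.pyRange 0 w 1).map (fun j => newCell city D h w i j),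
       (PySem.List.pyRange 0 w 1).any (fun j => decide (newCell city D h w i j ≠ dget D i j))) := by
  unfold sweepRow
  rw [foldl_snoc_or (fun j => newCell city D h w i j)
    (fun j => decide (newCell city D h w i j ≠ dget D i j))]
  simp

theorem sweep_eq (city : List (List Int)) (D : List (List (Option Int))) (h w : Int) :
    sweep city D h w =
      ((PySem.List.pyRange 0 h 1).map (fun i => (sweepRow city D h w i).1),
       (PySem.List.pyRange 0 h 1).any (fun i => (sweepRow city D h w i).2)) := by
  unfold sweep
  rw [foldl_snoc_or (fun i => (sweepRow city D h w i).1) (fun i => (sweepRow city D h w i).2)]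
  simp

theorem sweep_len (city : List (List Int)) (D : List (List (Option Int))) (H W : Nat) :
    (sweep city D (H : Int) (W : Int)).1.length = H := by
  rw [sweep_eq, pyRange0_natCast]
  simp

theorem sweep_row (city : List (List Int)) (D : List (List (Option Int))) (H W : Nat)
    (a : Nat) (ha : a < H) :
    ((sweep city D (H : Int) (W : Int)).1.getD a []) =
      (List.range W).map (fun b : Nat => newCell city D (H : Int) (W : Int) (a : Int) (b : Int)) := by
  rw [sweep_eq, pyRange0_natCast, List.map_map]
  rw [map_range_getD H _ a [] ha]
  show (sweepRow city D (H : Int) (W : Int) (a : Int)).1 = _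
  rw [sweepRow_eq, pyRange0_natCast, List.map_map]
  rfl

theorem sweep_row_len (city : List (List Int)) (D : List (List (Option Int))) (H W : Nat)
    (a : Nat) (ha : a < H) :
    ((sweep city D (H : Int) (W : Int)).1.getD a []).length = W := by
  rw [sweep_row city D H W a ha]
  simp

theorem sweep_entry (city : List (List Int)) (D : List (List (Option Int))) (H W : Nat)
    (a b : Nat) (ha : a < H) (hb : b < W) :
    DNt (sweep city D (H : Int) (W : Int)).1 a b =
      newCell city D (H : Int) (W : Int) (a : Int) (b : Int) := by
  unfold DNt
  rw [sweep_row city D H W a ha, map_range_getD W _ b none hb]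

theorem sweep_changed (city : List (List Int)) (D : List (List (Option Int))) (H W : Nat) :
    ((sweep city D (H : Int) (W : Int)).2 = true ↔
      ∃ a b : Nat, a < H ∧ b < W ∧
        newCell city D (H : Int) (W : Int) (a : Int) (b : Int) ≠ DNt D a b) := by
  rw [sweep_eq]
  simp only [List.any_eq_true, pyRange0_natCast, List.mem_map, List.mem_range]
  constructor
  · rintro ⟨i, ⟨a, ha, rfl⟩, hi⟩
    rw [sweepRow_eq] at hi
    simp only [List.any_eq_true, pyRange0_natCast, List.mem_map, List.mem_range] at hi
    obtain ⟨j, ⟨b, hb, rfl⟩, hj⟩ := hi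
    rw [decide_eq_true_iff, dget_nat] at hj
    exact ⟨a, b, ha, hb, hj⟩
  · rintro ⟨a, b, ha, hb, hne⟩
    refine ⟨(a : Int), ⟨a, ha, rfl⟩, ?_⟩
    rw [sweepRow_eq]
    simp only [List.any_eq_true, pyRange0_natCast, List.mem_map, List.mem_range]
    exact ⟨(b : Int), ⟨b, hb, rfl⟩, by rw [decide_eq_true_iff, dget_nat]; exact hne⟩

-- ---- analysis of the relaxation fold ----
theorem relax_keep (h w : Int) (D : List (List (Option Int))) (v : Int) :
    ∀ cs : List (Int × Int),
      (∀ c ∈ cs, (0 ≤ c.1 ∧ c.1 < h ∧ 0 ≤ c.2 ∧ c.2 < w) →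
        ∀ t, dget D c.1 c.2 = some t → v ≤ t + 1) →
      cs.foldl (relaxStep h w D) (some v) = some v := by
  intro cs
  induction cs with
  | nil => intro _; rfl
  | cons c cs ih =>
    intro hcs
    simp only [List.foldl_cons]
    have hstep : relaxStep h w D (some v) c = some v := by
      unfold relaxStep
      split
      · next hg =>
        cases hd : dget D c.1 c.2 with
        | none => rfl
        | some t =>
          have := hcs c (by simp) hg t hd
          simp only []
          rw [if_neg (by omega)]
      · rfl
    rw [hstep]
    exact ih (fun c' hc' => hcs c' (by simp [hc']))

theorem relax_none_not (h w : Int) (D : List (List (Option Int))) :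
    ∀ cs : List (Int × Int),
      (∀ c ∈ cs, (0 ≤ c.1 ∧ c.1 < h ∧ 0 ≤ c.2 ∧ c.2 < w) → dget D c.1 c.2 = none) →
      cs.foldl (relaxStep h w D) none = none := by
  intro cs
  induction cs with
  | nil => intro _; rfl
  | cons c cs ih =>
    intro hcs
    simp only [List.foldl_cons]
    have hstep : relaxStep h w D none c = none := by
      unfold relaxStep
      split
      · next hg => rw [hcs c (by simp) hg]
      · rfl
    rw [hstep]
    exact ih (fun c' hc' => hcs c' (by simp [hc']))

theorem relax_none_hit (h w : Int) (D : List (List (Option Int))) (K : Int) :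
    ∀ cs : List (Int × Int),
      (∀ c ∈ cs, (0 ≤ c.1 ∧ c.1 < h ∧ 0 ≤ c.2 ∧ c.2 < w) →
        dget D c.1 c.2 = none ∨ dget D c.1 c.2 = some K) →
      (∃ c ∈ cs, (0 ≤ c.1 ∧ c.1 < h ∧ 0 ≤ c.2 ∧ c.2 < w) ∧ dget D c.1 c.2 = some K) →
      cs.foldl (relaxStep h w D) none = some (K + 1) := by
  intro cs
  induction cs with
  | nil => rintro _ ⟨c, hc, _⟩; simp at hc
  | cons c cs ih =>
    rintro hcs hhit
    simp only [List.foldl_cons]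
    by_cases hfire : (0 ≤ c.1 ∧ c.1 < h ∧ 0 ≤ c.2 ∧ c.2 < w) ∧ dget D c.1 c.2 = some K
    · have hstep : relaxStep h w D none c = some (K + 1) := by
        unfold relaxStep
        rw [if_pos hfire.1, hfire.2]
      rw [hstep]
      apply relax_keep
      intro c' hc' hg' t hd'
      rcases hcs c' (by simp [hc']) hg' with hn | hk
      · rw [hn] at hd'; exact absurd hd' (by simp)
      · rw [hk] at hd'
        injection hd' with hd'
        omega
    · have hstep : relaxStep h w D none c = none := by
        unfold relaxStep
        split
        · next hg =>
          rcases hcs c (by simp) hg with hn | hk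
          · rw [hn]
          · exact absurd ⟨hg, hk⟩ hfire
        · rfl
      rw [hstep]
      apply ih (fun c' hc' => hcs c' (by simp [hc']))
      obtain ⟨c', hc', hg', hk'⟩ := hhit
      rcases List.mem_cons.mp hc' with rfl | hc'
      · exact absurd ⟨hg', hk'⟩ hfire
      · exact ⟨c', hc', hg', hk'⟩

-- ---- newCell under the cell classification ----
theorem newCell_nonW (g0 : List (List Int)) (D : List (List (Option Int))) (H W : Nat)
    (a b : Nat) (h1 : EN g0 a b ≠ 1) :
    newCell g0 D (H : Int) (W : Int) (a : Int) (b : Int) = DNt D a b := by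
  unfold newCell
  rw [cellGet_nat, if_neg h1, dget_nat]

theorem newCell_keep (g0 : List (List Int)) (D : List (List (Option Int))) (H W : Nat)
    (a b : Nat) (v : Int) (hw : EN g0 a b = 1) (hd : DNt D a b = some v)
    (hcons : ∀ a' b' : Nat, ∀ t : Int, a' < H → b' < W → adjN a b a' b' →
      DNt D a' b' = some t → v ≤ t + 1) :
    newCell g0 D (H : Int) (W : Int) (a : Int) (b : Int) = some v := by
  unfold newCell
  rw [cellGet_nat, if_pos hw, dget_nat, hd]
  apply relax_keep
  intro c hc hg t hdg
  obtain ⟨a', b', rfl, ha', hb', hadj⟩ := mem_nbrsJ_bounds H W a b c hc hg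
  rw [dget_nat] at hdg
  exact hcons a' b' t ha' hb' hadj hdg

theorem newCell_disc_none (g0 : List (List Int)) (D : List (List (Option Int))) (H W : Nat)
    (a b : Nat) (hw : EN g0 a b = 1) (hd : DNt D a b = none)
    (hno : ∀ a' b' : Nat, a' < H → b' < W → adjN a b a' b' → DNt D a' b' = none) :
    newCell g0 D (H : Int) (W : Int) (a : Int) (b : Int) = none := by
  unfold newCell
  rw [cellGet_nat, if_pos hw, dget_nat, hd]
  apply relax_none_not
  intro c hc hg
  obtain ⟨a', b', rfl, ha', hb', hadj⟩ := mem_nbrsJ_bounds H W a b c hc hg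
  rw [dget_nat]
  exact hno a' b' ha' hb' hadj

theorem newCell_disc_hit (g0 : List (List Int)) (D : List (List (Option Int))) (H W : Nat)
    (a b : Nat) (K : Int) (hw : EN g0 a b = 1) (hd : DNt D a b = none)
    (hKs : ∀ a' b' : Nat, a' < H → b' < W → adjN a b a' b' →
      DNt D a' b' = none ∨ DNt D a' b' = some K)
    (hhit : ∃ a' b' : Nat, a' < H ∧ b' < W ∧ adjN a b a' b' ∧ DNt D a' b' = some K) :
    newCell g0 D (H : Int) (W : Int) (a : Int) (b : Int) = some (K + 1) := by
  unfold newCell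
  rw [cellGet_nat, if_pos hw, dget_nat, hd]
  apply relax_none_hit
  · intro c hc hg
    obtain ⟨a', b', rfl, ha', hb', hadj⟩ := mem_nbrsJ_bounds H W a b c hc hg
    rw [dget_nat]
    exact hKs a' b' ha' hb' hadj
  · obtain ⟨a', b', ha', hb', hadj, hk⟩ := hhit
    obtain ⟨hmem, hg⟩ := adjN_mem_nbrsJ H W a b a' b' hadj ha' hb'
    exact ⟨((a' : Int), (b' : Int)), hmem, hg, by rw [dget_nat]; exact hk⟩

-- ---- counting `none` entries (fuel argument) ----
def noneCount (D : List (List (Option Int))) : Nat :=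
  (D.map (fun r => r.countP (fun o => o.isNone))).sum

theorem countP_le_pointwise (p : Option Int → Bool) :
    ∀ (r r' : List (Option Int)), r.length = r'.length →
      (∀ b, b < r.length → p (r'.getD b none) = true → p (r.getD b none) = true) →
      r'.countP p ≤ r.countP p := by
  intro r
  induction r with
  | nil =>
    intro r' hl _
    cases r' with
    | nil => exact le_rfl
    | cons y ys => simp at hl
  | cons x xs ih =>
    intro r' hl hp
    cases r' with
    | nil => simp at hl
    | cons y ys =>
      simp only [List.countP_cons]
      have h0 := hp 0 (by simp) 
      simp only [List.getD_cons_zero] at h0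
      have htail := ih ys (by simpa using hl) (fun b hb => by
        have := hp (b + 1) (by simpa using Nat.succ_lt_succ hb)
        simpa using this)
      by_cases hy : p y = true
      · rw [if_pos hy, if_pos (h0 hy)]
        omega
      · rw [if_neg hy]
        split <;> omega

theorem countP_lt_pointwise (p : Option Int → Bool) :
    ∀ (r r' : List (Option Int)), r.length = r'.length →
      (∀ b, b < r.length → p (r'.getD b none) = true → p (r.getD b none) = true) →
      (∃ b, b < r.length ∧ p (r'.getD b none) = false ∧ p (r.getD b none) = true) →
      r'.countP p < r.countP p := by
  intro r
  induction r with
  | nil =>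
    rintro r' _ _ ⟨b, hb, _⟩
    simp at hb
  | cons x xs ih =>
    rintro r' hl hp ⟨b, hb, hw1, hw2⟩
    cases r' with
    | nil => simp at hl
    | cons y ys =>
      simp only [List.countP_cons]
      have htailmono := countP_le_pointwise p xs ys (by simpa using hl) (fun b hb => by
        have := hp (b + 1) (by simpa using Nat.succ_lt_succ hb)
        simpa using this)
      cases b with
      | zero =>
        simp only [List.getD_cons_zero] at hw1 hw2
        rw [if_pos hw2, if_neg (by simp [hw1])]
        omega
      | succ b =>
        simp only [List.getD_cons_succ] at hw1 hw2
        have htail := ih ys (by simpa using hl) (fun b hb => by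
          have := hp (b + 1) (by simpa using Nat.succ_lt_succ hb)
          simpa using this) ⟨b, by simpa using hb, hw1, hw2⟩
        have h0 := hp 0 (by simp)
        simp only [List.getD_cons_zero] at h0
        by_cases hy : p y = true
        · rw [if_pos hy, if_pos (h0 hy)]; omega
        · rw [if_neg hy]; split <;> omega

theorem noneCount_eq_range :
    ∀ (D : List (List (Option Int))),
      noneCount D =
        ((List.range D.length).map (fun a => (D.getD a []).countP (fun o => o.isNone))).sum := by
  intro D
  induction D with
  | nil => simp [noneCount]
  | cons r D ih =>
    simp only [noneCount, List.map_cons, List.sum_cons, List.length_cons,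
      List.range_succ_eq_map, List.map_map]
    have hmap : List.map ((fun a => ((r :: D).getD a []).countP (fun o => o.isNone)) ∘ Nat.succ)
        (List.range D.length) =
        List.map (fun a => (D.getD a []).countP (fun o => o.isNone)) (List.range D.length) := by
      apply List.map_congr_left
      intro a _
      rfl
    rw [hmap]
    simp only [List.getD_cons_zero]
    simp only [noneCount] at ih
    omega

theorem sum_map_range_le (n : Nat) (f g : Nat → Nat) (h : ∀ a, a < n → f a ≤ g a) :
    ((List.range n).map f).sum ≤ ((List.range n).map g).sum := by
  induction n with
  | zero => simp
  | succ n ih =>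
    simp only [List.range_succ, List.map_append, List.sum_append, List.map_cons,
      List.sum_cons, List.map_nil, List.sum_nil]
    have h1 := ih (fun a ha => h a (by omega))
    have h2 := h n (by omega)
    omega

theorem sum_map_range_lt (n : Nat) (f g : Nat → Nat) (h : ∀ a, a < n → f a ≤ g a)
    (hw : ∃ a, a < n ∧ f a < g a) :
    ((List.range n).map f).sum < ((List.range n).map g).sum := by
  cases n with
  | zero => obtain ⟨a, ha, _⟩ := hw; omega
  | succ n =>
    simp only [List.range_succ, List.map_append, List.sum_append, List.map_cons,
      List.sum_cons, List.map_nil, List.sum_nil]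
    obtain ⟨a, ha, haw⟩ := hw
    by_cases han : a < n
    · have h1 := sum_map_range_lt n f g (fun a' ha' => h a' (by omega)) ⟨a, han, haw⟩
      have h2 := h n (by omega)
      omega
    · have han' : a = n := by omega
      subst han'
      have h1 := sum_map_range_le a f g (fun a' ha' => h a' (by omega))
      omega

theorem countP_lt_len (p : Option Int → Bool) :
    ∀ (r : List (Option Int)) (b : Nat), b < r.length → p (r.getD b none) = false →
      r.countP p < r.length := by
  intro r
  induction r with
  | nil => intro b hb _; simp at hb
  | cons x xs ih =>
    intro b hb hp
    simp only [List.countP_cons, List.length_cons]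
    have hle := List.countP_le_length (p := p) (l := xs)
    cases b with
    | zero =>
      simp only [List.getD_cons_zero] at hp
      rw [if_neg (by simp [hp])]
      omega
    | succ b =>
      simp only [List.getD_cons_succ] at hp
      have := ih b (by simpa using hb) hp
      split <;> omega

-- ---- the coupling invariant between level-BFS states and Jacobi distance tables ----
structure JInv (H W : Nat) (g0 : List (List Int)) (D0 : List (List (Option Int))) (k : Nat)
    (g : List (List Int)) (vis : List (List Bool)) (D : List (List (Option Int)))
    (front : List (Int × Int)) : Prop where
  gshape : sameShape g g0
  dlen : D.length = H
  drow : ∀ a : Nat, a < H → (D.getD a []).length = W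
  vlen : vis.length = H
  vrow : ∀ a : Nat, a < H → (vis.getD a []).length = W
  tails : ∀ a b : Nat, a < H → W ≤ b → EN g a b = EN g0 a b
  nonW : ∀ a b : Nat, a < H → b < W → EN g0 a b ≠ 1 →
      EN g a b = EN g0 a b ∧ DNt D a b = DNt D0 a b
  wNone : ∀ a b : Nat, a < H → b < W → EN g0 a b = 1 → DNt D a b = none →
      VN vis a b = false ∧ EN g a b = 1
  wSome : ∀ a b : Nat, ∀ v : Int, a < H → b < W → EN g0 a b = 1 → DNt D a b = some v →
      VN vis a b = true ∧ EN g a b = v ∧ 1 ≤ v ∧ v ≤ (k : Int)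
  fSound : ∀ c ∈ front, ∃ a b : Nat, c = ((a : Int), (b : Int)) ∧ a < H ∧ b < W ∧
      DNt D a b = some (k : Int)
  fComp : ∀ a b : Nat, a < H → b < W → DNt D a b = some (k : Int) →
      ((a : Int), (b : Int)) ∈ front
  closed : ∀ a b : Nat, a < H → b < W → EN g0 a b = 1 → DNt D a b = none →
      ∀ a' b' : Nat, a' < H → b' < W → adjN a b a' b' →
        DNt D a' b' = none ∨ DNt D a' b' = some (k : Int)
  consist : ∀ a b : Nat, ∀ v : Int, a < H → b < W → EN g0 a b = 1 → DNt D a b = some v →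
      ∀ a' b' : Nat, ∀ t : Int, a' < H → b' < W → adjN a b a' b' → DNt D a' b' = some t →
        v ≤ t + 1

theorem inv_fire_iff (H W : Nat) (g0 : List (List Int)) (D0 : List (List (Option Int)))
    (k : Nat) (g : List (List Int)) (vis : List (List Bool)) (D : List (List (Option Int)))
    (front : List (Int × Int)) (inv : JInv H W g0 D0 k g vis D front) (a b : Nat) :
    FireP H W front g vis a b ↔
      (a < H ∧ b < W ∧ EN g0 a b = 1 ∧ DNt D a b = none ∧
        ∃ a' b' : Nat, a' < H ∧ b' < W ∧ adjN a b a' b' ∧ DNt D a' b' = some (k : Int)) := by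
  constructor
  · rintro ⟨ha, hb, hvf, he1, f, hf, hmem⟩
    have hW : EN g0 a b = 1 := by
      by_contra hne
      have := (inv.nonW a b ha hb hne).1
      rw [this] at he1
      exact hne he1
    have hnone : DNt D a b = none := by
      cases hd : DNt D a b with
      | none => rfl
      | some v =>
        have := (inv.wSome a b v ha hb hW hd).1
        rw [this] at hvf
        simp at hvf
    obtain ⟨a', b', rfl, ha', hb', hk⟩ := inv.fSound f hf
    rw [mem_nbrsB_iff_adjN] at hmem
    exact ⟨ha, hb, hW, hnone, a', b', ha', hb', hmem, hk⟩
  · rintro ⟨ha, hb, hW, hnone, a', b', ha', hb', hadj, hk⟩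
    obtain ⟨hvf, he1⟩ := inv.wNone a b ha hb hW hnone
    refine ⟨ha, hb, hvf, he1, ((a' : Int), (b' : Int)), inv.fComp a' b' ha' hb' hk, ?_⟩
    rw [mem_nbrsB_iff_adjN]
    exact hadj

theorem inv_sweep_entry (H W : Nat) (g0 : List (List Int)) (D0 : List (List (Option Int)))
    (k : Nat) (g : List (List Int)) (vis : List (List Bool)) (D : List (List (Option Int)))
    (front : List (Int × Int)) (inv : JInv H W g0 D0 k g vis D front) (a b : Nat)
    (ha : a < H) (hb : b < W) :
    (FireP H W front g vis a b →
      DNt (sweep g0 D (H : Int) (W : Int)).1 a b = some ((k : Int) + 1)) ∧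
    (¬ FireP H W front g vis a b →
      DNt (sweep g0 D (H : Int) (W : Int)).1 a b = DNt D a b) := by
  rw [sweep_entry g0 D H W a b ha hb]
  constructor
  · intro hF
    obtain ⟨-, -, hW, hnone, a', b', ha', hb', hadj, hk⟩ :=
      (inv_fire_iff H W g0 D0 k g vis D front inv a b).mp hF
    exact newCell_disc_hit g0 D H W a b (k : Int) hW hnone
      (fun a' b' ha' hb' hadj => inv.closed a b ha hb hW hnone a' b' ha' hb' hadj)
      ⟨a', b', ha', hb', hadj, hk⟩
  · intro hF
    by_cases hW : EN g0 a b = 1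
    · cases hd : DNt D a b with
      | some v =>
        exact newCell_keep g0 D H W a b v hW hd
          (fun a' b' t ha' hb' hadj ht => inv.consist a b v ha hb hW hd a' b' t ha' hb' hadj ht)
      | none =>
        apply newCell_disc_none g0 D H W a b hW hd
        intro a' b' ha' hb' hadj
        rcases inv.closed a b ha hb hW hd a' b' ha' hb' hadj with hn | hk
        · exact hn
        · exfalso
          apply hF
          exact (inv_fire_iff H W g0 D0 k g vis D front inv a b).mpr
            ⟨ha, hb, hW, hd, a', b', ha', hb', hadj, hk⟩
    · exact newCell_nonW g0 D H W a b hW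

theorem jstep (H W : Nat) (g0 : List (List Int)) (D0 : List (List (Option Int))) (k : Nat)
    (g : List (List Int)) (vis : List (List Bool)) (D : List (List (Option Int)))
    (front : List (Int × Int))
    (Hg0len : g0.length = H)
    (Hg0row : ∀ a : Nat, a < H → W ≤ (g0.getD a []).length)
    (HD0 : ∀ a b : Nat, a < H → b < W → DNt D0 a b = none ∨ DNt D0 a b = some 0)
    (inv : JInv H W g0 D0 k g vis D front) :
    JInv H W g0 D0 (k + 1) (roundB (H : Int) (W : Int) ((k : Int) + 1) front g vis).1
        (roundB (H : Int) (W : Int) ((k : Int) + 1) front g vis).2.1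
        (sweep g0 D (H : Int) (W : Int)).1
        (roundB (H : Int) (W : Int) ((k : Int) + 1) front g vis).2.2 ∧
      ((sweep g0 D (H : Int) (W : Int)).2 = true ↔
        (roundB (H : Int) (W : Int) ((k : Int) + 1) front g vis).2.2 ≠ []) ∧
      (∀ a b : Nat, a < H → b < W → DNt (sweep g0 D (H : Int) (W : Int)).1 a b = none →
        DNt D a b = none) ∧
      ((roundB (H : Int) (W : Int) ((k : Int) + 1) front g vis).2.2 ≠ [] →
        ∃ a b : Nat, a < H ∧ b < W ∧ DNt D a b = none ∧
          DNt (sweep g0 D (H : Int) (W : Int)).1 a b ≠ none) ∧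
      ((roundB (H : Int) (W : Int) ((k : Int) + 1) front g vis).2.2 = [] →
        (sweep g0 D (H : Int) (W : Int)).1 = D ∧
          (roundB (H : Int) (W : Int) ((k : Int) + 1) front g vis).1 = g) := by
  have hdesc : Desc ((k : Int) + 1) g vis (FireP H W front g vis)
      (roundB (H : Int) (W : Int) ((k : Int) + 1) front g vis) :=
    roundB_desc H W ((k : Int) + 1) g vis
      (by rw [inv.gshape.1, Hg0len])
      (fun a ha => by rw [inv.gshape.2 a]; exact Hg0row a ha)
      (by rw [inv.vlen])
      (fun a ha => by rw [inv.vrow a ha])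
      front
  obtain ⟨hsh1, hsh2, hfire, hnofire, hacc⟩ := hdesc
  have hsweepF : ∀ a b : Nat, a < H → b < W → FireP H W front g vis a b →
      DNt (sweep g0 D (H : Int) (W : Int)).1 a b = some ((k : Int) + 1) :=
    fun a b ha hb => (inv_sweep_entry H W g0 D0 k g vis D front inv a b ha hb).1
  have hsweepN : ∀ a b : Nat, a < H → b < W → ¬ FireP H W front g vis a b →
      DNt (sweep g0 D (H : Int) (W : Int)).1 a b = DNt D a b :=
    fun a b ha hb => (inv_sweep_entry H W g0 D0 k g vis D front inv a b ha hb).2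
  have hcast : ((k : Int) + 1) = ((k + 1 : Nat) : Int) := by push_cast; ring
  have hFb : ∀ a b : Nat, FireP H W front g vis a b → a < H ∧ b < W :=
    fun a b hf => ⟨hf.1, hf.2.1⟩
  have hnfW : ∀ a b : Nat, W ≤ b → ¬ FireP H W front g vis a b :=
    fun a b hbW hf => by have := hf.2.1; omega
  refine ⟨?_, ?_, ?_, ?_, ?_⟩
  · refine ⟨sameShape_trans hsh1 inv.gshape, sweep_len g0 D H W,
      fun a ha => sweep_row_len g0 D H W a ha, hsh2.1.trans inv.vlen,
      fun a ha => by rw [hsh2.2 a]; exact inv.vrow a ha, ?_, ?_, ?_, ?_, ?_, ?_, ?_, ?_⟩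
    · -- tails
      intro a b ha hbW
      rw [(hnofire a b (hnfW a b hbW)).1]
      exact inv.tails a b ha hbW
    · -- nonW
      intro a b ha hb hne1
      have hnf : ¬ FireP H W front g vis a b := fun hf => by
        have h1 := hf.2.2.2.1
        rw [(inv.nonW a b ha hb hne1).1] at h1
        exact hne1 h1
      rw [(hnofire a b hnf).1, hsweepN a b ha hb hnf]
      exact inv.nonW a b ha hb hne1
    · -- wNone
      intro a b ha hb hW hnone
      have hnf : ¬ FireP H W front g vis a b := fun hf => by
        rw [hsweepF a b ha hb hf] at hnone
        exact Option.some_ne_none _ hnone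
      rw [hsweepN a b ha hb hnf] at hnone
      obtain ⟨h1, h2⟩ := inv.wNone a b ha hb hW hnone
      rw [(hnofire a b hnf).1, (hnofire a b hnf).2]
      exact ⟨h1, h2⟩
    · -- wSome
      intro a b v ha hb hW hv
      by_cases hf : FireP H W front g vis a b
      · have hv' := hsweepF a b ha hb hf
        rw [hv'] at hv
        injection hv with hv
        obtain ⟨h1, h2⟩ := hfire a b hf
        have hk0 : (0 : Int) ≤ (k : Int) := Int.natCast_nonneg k
        refine ⟨h2, by rw [h1, hv], by omega, ?_⟩
        rw [← hv, hcast]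
      · rw [hsweepN a b ha hb hf] at hv
        obtain ⟨h1, h2, h3, h4⟩ := inv.wSome a b v ha hb hW hv
        obtain ⟨h5, h6⟩ := hnofire a b hf
        refine ⟨by rw [h6]; exact h1, by rw [h5]; exact h2, h3, ?_⟩
        have : ((k : Nat) : Int) ≤ ((k + 1 : Nat) : Int) := by push_cast; omega
        omega
    · -- fSound
      intro c hc
      obtain ⟨a, b, rfl, hf⟩ := (hacc c).mp hc
      refine ⟨a, b, rfl, hf.1, hf.2.1, ?_⟩
      rw [hsweepF a b hf.1 hf.2.1 hf, hcast]
    · -- fComp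
      intro a b ha hb hv
      by_cases hf : FireP H W front g vis a b
      · exact (hacc _).mpr ⟨a, b, rfl, hf⟩
      · exfalso
        rw [hsweepN a b ha hb hf] at hv
        by_cases hW : EN g0 a b = 1
        · obtain ⟨-, -, h3, h4⟩ := inv.wSome a b _ ha hb hW hv
          rw [← hcast] at h4
          omega
        · have := (inv.nonW a b ha hb hW).2
          rw [this] at hv
          rcases HD0 a b ha hb with hn | h0
          · rw [hn] at hv; simp at hv
          · rw [h0] at hv
            injection hv with hv
            rw [← hcast] at hv
            omega
    · -- closed
      intro a b ha hb hW hnone a' b' ha' hb' hadj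
      have hnf : ¬ FireP H W front g vis a b := fun hf => by
        rw [hsweepF a b ha hb hf] at hnone
        exact Option.some_ne_none _ hnone
      have hD : DNt D a b = none := by
        rw [hsweepN a b ha hb hnf] at hnone
        exact hnone
      have hnbr : DNt D a' b' = none := by
        rcases inv.closed a b ha hb hW hD a' b' ha' hb' hadj with hn | hk
        · exact hn
        · exfalso
          exact hnf ((inv_fire_iff H W g0 D0 k g vis D front inv a b).mpr
            ⟨ha, hb, hW, hD, a', b', ha', hb', hadj, hk⟩)
      by_cases hf' : FireP H W front g vis a' b'
      · right
        rw [hsweepF a' b' ha' hb' hf', hcast]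
      · left
        rw [hsweepN a' b' ha' hb' hf']
        exact hnbr
    · -- consist
      intro a b v ha hb hW hv a' b' t ha' hb' hadj ht
      have hk0 : (0 : Int) ≤ (k : Int) := Int.natCast_nonneg k
      by_cases hfa : FireP H W front g vis a b
      · have hva := hsweepF a b ha hb hfa
        rw [hva] at hv
        injection hv with hv
        obtain ⟨-, -, -, hDa, -⟩ := (inv_fire_iff H W g0 D0 k g vis D front inv a b).mp hfa
        by_cases hfb : FireP H W front g vis a' b'
        · have htb := hsweepF a' b' ha' hb' hfb
          rw [htb] at ht
          injection ht with ht
          omega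
        · rw [hsweepN a' b' ha' hb' hfb] at ht
          rcases inv.closed a b ha hb hW hDa a' b' ha' hb' hadj with hn | hk
          · rw [hn] at ht; simp at ht
          · rw [hk] at ht
            injection ht with ht
            omega
      · rw [hsweepN a b ha hb hfa] at hv
        obtain ⟨-, -, -, h4⟩ := inv.wSome a b v ha hb hW hv
        by_cases hfb : FireP H W front g vis a' b'
        · have htb := hsweepF a' b' ha' hb' hfb
          rw [htb] at ht
          injection ht with ht
          omega
        · rw [hsweepN a' b' ha' hb' hfb] at ht
          exact inv.consist a b v ha hb hW hv a' b' t ha' hb' hadj ht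
  · -- changed flag ↔ a cell was discovered
    rw [sweep_changed g0 D H W]
    constructor
    · rintro ⟨a, b, ha, hb, hne⟩
      by_cases hf : FireP H W front g vis a b
      · exact List.ne_nil_of_mem ((hacc _).mpr ⟨a, b, rfl, hf⟩)
      · exfalso
        apply hne
        rw [← sweep_entry g0 D H W a b ha hb]
        exact hsweepN a b ha hb hf
    · intro hne
      obtain ⟨e, he⟩ := List.exists_mem_of_ne_nil _ hne
      obtain ⟨a, b, rfl, hf⟩ := (hacc e).mp he
      obtain ⟨-, -, -, hDa, -⟩ := (inv_fire_iff H W g0 D0 k g vis D front inv a b).mp hf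
      refine ⟨a, b, hf.1, hf.2.1, ?_⟩
      rw [← sweep_entry g0 D H W a b hf.1 hf.2.1, hsweepF a b hf.1 hf.2.1 hf, hDa]
      exact Option.some_ne_none _
  · -- none entries only disappear
    intro a b ha hb hnone
    by_cases hf : FireP H W front g vis a b
    · rw [hsweepF a b ha hb hf] at hnone
      exact absurd hnone (Option.some_ne_none _)
    · rw [← hsweepN a b ha hb hf]
      exact hnone
  · -- a discovery is a strict none decrease witness
    intro hne
    obtain ⟨e, he⟩ := List.exists_mem_of_ne_nil _ hne
    obtain ⟨a, b, rfl, hf⟩ := (hacc e).mp he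
    obtain ⟨-, -, -, hDa, -⟩ := (inv_fire_iff H W g0 D0 k g vis D front inv a b).mp hf
    refine ⟨a, b, hf.1, hf.2.1, hDa, ?_⟩
    rw [hsweepF a b hf.1 hf.2.1 hf]
    exact Option.some_ne_none _
  · -- empty discovery: both sides are unchanged
    intro hnil
    have hnoF : ∀ a b : Nat, ¬ FireP H W front g vis a b := by
      intro a b hf
      have := (hacc _).mpr ⟨a, b, rfl, hf⟩
      rw [hnil] at this
      exact List.not_mem_nil this
    constructor
    · apply grid_ext (none : Option Int)
      · rw [sweep_len g0 D H W, inv.dlen]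
      · intro a
        by_cases ha : a < H
        · rw [sweep_row_len g0 D H W a ha, inv.drow a ha]
        · rw [getD_oob _ _ _ (by rw [sweep_len g0 D H W]; omega),
            getD_oob _ _ _ (by rw [inv.dlen]; omega)]
      · intro a b
        by_cases ha : a < H
        · by_cases hb : b < W
          · exact hsweepN a b ha hb (hnoF a b)
          · rw [getD_oob _ _ _ (by rw [sweep_row_len g0 D H W a ha]; omega),
              getD_oob _ _ _ (by rw [inv.drow a ha]; omega)]
        · rw [getD_oob (l := (sweep g0 D (H : Int) (W : Int)).1) _ _
              (by rw [sweep_len g0 D H W]; omega),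
            getD_oob (l := D) _ _ (by rw [inv.dlen]; omega)]
    · apply grid_ext (0 : Int)
      · exact hsh1.1
      · exact hsh1.2
      · intro a b
        exact (hnofire a b (hnoF a b)).1

-- ---- pointwise characterization of the final write-back ----
theorem pyRange0_succ (m : Nat) :
    PySem.List.pyRange 0 ((m + 1 : Nat) : Int) 1 =
      PySem.List.pyRange 0 (m : Int) 1 ++ [(m : Int)] := by
  have : ((m + 1 : Nat) : Int) = (m : Int) + 1 := by push_cast; ring
  rw [this, PySem.List.pyRange_one_succ_right (Int.natCast_nonneg m)]

theorem wbRow_spec (D : List (List (Option Int))) (i W : Nat) :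
    ∀ (m : Nat), m ≤ W → ∀ (G : List (List Int)), i < G.length → W ≤ (G.getD i []).length →
      sameShape ((PySem.List.pyRange 0 (m : Int) 1).foldl (wbStep D (i : Int)) G) G ∧
      (∀ a b : Nat, (a ≠ i ∨ m ≤ b) →
        EN ((PySem.List.pyRange 0 (m : Int) 1).foldl (wbStep D (i : Int)) G) a b = EN G a b) ∧
      (∀ b : Nat, b < m →
        EN ((PySem.List.pyRange 0 (m : Int) 1).foldl (wbStep D (i : Int)) G) i b =
          (if EN G i b = 1 ∧ (DNt D i b).isSome then (DNt D i b).getD 0 else EN G i b)) := by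
  intro m
  induction m with
  | zero =>
    intro _ G hi hrow
    rw [show ((0 : Nat) : Int) = (0 : Int) from rfl, PySem.List.pyRange_one_eq_nil le_rfl]
    exact ⟨sameShape_refl G, fun a b _ => rfl, fun b hb => absurd hb (by omega)⟩
  | succ m ih =>
    intro hmW G hi hrow
    obtain ⟨ihs, ihu, ihv⟩ := ih (by omega) G hi hrow
    rw [pyRange0_succ, List.foldl_append]
    set Gm := (PySem.List.pyRange 0 (m : Int) 1).foldl (wbStep D (i : Int)) G with hGm
    simp only [List.foldl_cons, List.foldl_nil]
    have hcellm : cellGet Gm (i : Int) (m : Int) = EN G i m := by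
      rw [cellGet_nat]
      exact ihu i m (Or.inr le_rfl)
    have hGmL : i < Gm.length := by rw [ihs.1]; exact hi
    have hGmR : m < (Gm.getD i []).length := by rw [ihs.2 i]; omega
    unfold wbStep
    by_cases hcond : EN G i m = 1 ∧ (DNt D i m).isSome = true
    · rw [if_pos (by rw [hcellm, dget_nat]; exact hcond)]
      refine ⟨sameShape_trans (sameShape_cellSet _ _ _ _) ihs, ?_, ?_⟩
      · intro a b hab
        have hne : ¬(a = i ∧ b = m) := by
          rintro ⟨rfl, rfl⟩
          rcases hab with h | h
          · exact h rfl
          · omega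
        rw [EN_cellSet_other Gm i m a b _ hne]
        apply ihu
        rcases hab with h | h
        · exact Or.inl h
        · exact Or.inr (by omega)
      · intro b hb
        by_cases hbm : b = m
        · subst hbm
          rw [dget_nat, EN_cellSet_self Gm i b _ hGmL hGmR, if_pos hcond]
        · rw [EN_cellSet_other Gm i m i b _ (by tauto)]
          exact ihv b (by omega)
    · rw [if_neg (by rw [hcellm, dget_nat]; exact hcond)]
      refine ⟨ihs, ?_, ?_⟩
      · intro a b hab
        apply ihu
        rcases hab with h | h
        · exact Or.inl h
        · exact Or.inr (by omega)
      · intro b hb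
        by_cases hbm : b = m
        · subst hbm
          rw [if_neg hcond]
          exact ihu i b (Or.inr le_rfl)
        · exact ihv b (by omega)

theorem wbAll_spec (D : List (List (Option Int))) (H W : Nat) :
    ∀ (n : Nat), n ≤ H → ∀ (G : List (List Int)), G.length = H →
      (∀ a : Nat, a < H → W ≤ (G.getD a []).length) →
      sameShape ((PySem.List.pyRange 0 (n : Int) 1).foldl
        (fun g i => (PySem.List.pyRange 0 (W : Int) 1).foldl (wbStep D i) g) G) G ∧
      (∀ a b : Nat, n ≤ a →
        EN ((PySem.List.pyRange 0 (n : Int) 1).foldl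
          (fun g i => (PySem.List.pyRange 0 (W : Int) 1).foldl (wbStep D i) g) G) a b = EN G a b) ∧
      (∀ a b : Nat, a < n →
        EN ((PySem.List.pyRange 0 (n : Int) 1).foldl
          (fun g i => (PySem.List.pyRange 0 (W : Int) 1).foldl (wbStep D i) g) G) a b =
          (if b < W ∧ EN G a b = 1 ∧ (DNt D a b).isSome then (DNt D a b).getD 0
           else EN G a b)) := by
  intro n
  induction n with
  | zero =>
    intro _ G hGl hGr
    rw [show ((0 : Nat) : Int) = (0 : Int) from rfl, PySem.List.pyRange_one_eq_nil le_rfl]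
    exact ⟨sameShape_refl G, fun a b _ => rfl, fun a b hb => absurd hb (by omega)⟩
  | succ n ih =>
    intro hnH G hGl hGr
    obtain ⟨ihs, ihu, ihv⟩ := ih (by omega) G hGl hGr
    rw [pyRange0_succ, List.foldl_append]
    set Gn := (PySem.List.pyRange 0 (n : Int) 1).foldl
      (fun g i => (PySem.List.pyRange 0 (W : Int) 1).foldl (wbStep D i) g) G with hGn
    simp only [List.foldl_cons, List.foldl_nil]
    have hGnL : n < Gn.length := by rw [ihs.1, hGl]; omega
    have hGnR : W ≤ (Gn.getD n []).length := by rw [ihs.2 n]; exact hGr n (by omega)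
    obtain ⟨rs, ru, rv⟩ := wbRow_spec D n W W le_rfl Gn hGnL hGnR
    refine ⟨sameShape_trans rs ihs, ?_, ?_⟩
    · intro a b hab
      rw [ru a b (Or.inl (by omega))]
      exact ihu a b (by omega)
    · intro a b ha
      by_cases han : a = n
      · subst han
        by_cases hbW : b < W
        · rw [rv b hbW, ihu a b le_rfl]
          have hD : DNt D a b = DNt D a b := rfl
          by_cases hc : EN G a b = 1 ∧ (DNt D a b).isSome = true
          · rw [if_pos hc, if_pos ⟨hbW, hc⟩]
          · rw [if_neg hc, if_neg (by tauto)]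
        · rw [ru a b (Or.inr (by omega)), ihu a b le_rfl, if_neg (by tauto)]
      · have han : a < n := by omega
        rw [ru a b (Or.inl (by omega))]
        exact ihv a b han

theorem writeback_spec (D : List (List (Option Int))) (H W : Nat) (G : List (List Int))
    (hGl : G.length = H) (hGr : ∀ a : Nat, a < H → W ≤ (G.getD a []).length) :
    sameShape (writeback D G (H : Int) (W : Int)) G ∧
    (∀ a b : Nat, a < H →
      EN (writeback D G (H : Int) (W : Int)) a b =
        (if b < W ∧ EN G a b = 1 ∧ (DNt D a b).isSome then (DNt D a b).getD 0 else EN G a b)) ∧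
    (∀ a b : Nat, H ≤ a → EN (writeback D G (H : Int) (W : Int)) a b = EN G a b) := by
  obtain ⟨hs, hu, hv⟩ := wbAll_spec D H W H le_rfl G hGl hGr
  exact ⟨hs, fun a b ha => hv a b ha, fun a b ha => hu a b ha⟩

-- at any stage of the coupling, the level-BFS grid IS the write-back of the table
theorem jinv_writeback (H W : Nat) (g0 : List (List Int)) (D0 : List (List (Option Int)))
    (k : Nat) (g : List (List Int)) (vis : List (List Bool)) (D : List (List (Option Int)))
    (front : List (Int × Int))
    (Hg0len : g0.length = H)
    (Hg0row : ∀ a : Nat, a < H → W ≤ (g0.getD a []).length)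
    (inv : JInv H W g0 D0 k g vis D front) :
    g = writeback D g0 (H : Int) (W : Int) := by
  obtain ⟨ws, wv, wu⟩ := writeback_spec D H W g0 Hg0len Hg0row
  apply grid_ext (0 : Int)
  · rw [inv.gshape.1, ws.1]
  · intro a
    rw [inv.gshape.2 a, ws.2 a]
  · intro a b
    by_cases ha : a < H
    · by_cases hb : b < W
      · rw [show (g.getD a []).getD b 0 = EN g a b from rfl,
          show ((writeback D g0 (H : Int) (W : Int)).getD a []).getD b 0 =
            EN (writeback D g0 (H : Int) (W : Int)) a b from rfl, wv a b ha]
        by_cases hW : EN g0 a b = 1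
        · cases hd : DNt D a b with
          | some v =>
            rw [if_pos ⟨hb, hW, rfl⟩]
            simp only [Option.getD_some]
            exact (inv.wSome a b v ha hb hW hd).2.1
          | none =>
            rw [if_neg (by simp)]
            rw [hW]
            exact (inv.wNone a b ha hb hW hd).2
        · rw [if_neg (by tauto)]
          exact (inv.nonW a b ha hb hW).1
      · rw [show (g.getD a []).getD b 0 = EN g a b from rfl,
          show ((writeback D g0 (H : Int) (W : Int)).getD a []).getD b 0 =
            EN (writeback D g0 (H : Int) (W : Int)) a b from rfl, wv a b ha,
          if_neg (by intro hcc; exact absurd hcc.1 (by omega)), inv.tails a b ha (by omega)]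
    · rw [show (g.getD a []).getD b 0 = EN g a b from rfl,
        show ((writeback D g0 (H : Int) (W : Int)).getD a []).getD b 0 =
          EN (writeback D g0 (H : Int) (W : Int)) a b from rfl, wu a b (by omega)]
      unfold EN
      rw [getD_oob g _ _ (by rw [inv.gshape.1, Hg0len]; omega),
        getD_oob g0 _ _ (by rw [Hg0len]; omega)]

-- ---- fuel accounting ----
theorem noneCount_sweep_lt (H W : Nat) (D S1 : List (List (Option Int)))
    (hDl : D.length = H) (hDr : ∀ a : Nat, a < H → (D.getD a []).length = W)
    (hSl : S1.length = H) (hSr : ∀ a : Nat, a < H → (S1.getD a []).length = W)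
    (hmono : ∀ a b : Nat, a < H → b < W → DNt S1 a b = none → DNt D a b = none)
    (hwit : ∃ a b : Nat, a < H ∧ b < W ∧ DNt D a b = none ∧ DNt S1 a b ≠ none) :
    noneCount S1 < noneCount D := by
  rw [noneCount_eq_range S1, noneCount_eq_range D, hSl, hDl]
  obtain ⟨a, b, ha, hb, hDn, hSn⟩ := hwit
  apply sum_map_range_lt
  · intro a' ha'
    apply countP_le_pointwise
    · rw [hDr a' ha', hSr a' ha']
    · intro b' hb'
      rw [hDr a' ha'] at hb'
      simp only [Option.isNone_iff_eq_none]
      exact hmono a' b' ha' hb'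
  · refine ⟨a, ha, ?_⟩
    apply countP_lt_pointwise
    · rw [hDr a ha, hSr a ha]
    · intro b' hb'
      rw [hDr a ha] at hb'
      simp only [Option.isNone_iff_eq_none]
      exact hmono a b' ha hb'
    · refine ⟨b, by rw [hDr a ha]; exact hb, ?_, ?_⟩
      · simp only [Option.isNone_eq_false_iff, Option.isSome_iff_ne_none]
        exact hSn
      · simp only [Option.isNone_iff_eq_none]
        exact hDn

theorem sum_map_range_const (n c : Nat) : ((List.range n).map (fun _ => c)).sum = n * c := by
  induction n with
  | zero => simp
  | succ n ih =>
    simp only [List.range_succ, List.map_append, List.sum_append, List.map_cons,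
      List.sum_cons, List.map_nil, List.sum_nil]
    rw [Nat.succ_mul]
    omega

theorem noneCount_lt_full (H W : Nat) (D : List (List (Option Int)))
    (hDl : D.length = H) (hDr : ∀ a : Nat, a < H → (D.getD a []).length = W)
    (hwit : ∃ a b : Nat, a < H ∧ b < W ∧ DNt D a b ≠ none) :
    noneCount D < H * W := by
  rw [noneCount_eq_range D, hDl, ← sum_map_range_const H W]
  obtain ⟨a, b, ha, hb, hne⟩ := hwit
  apply sum_map_range_lt
  · intro a' ha'
    have := List.countP_le_length (p := fun o => o.isNone) (l := D.getD a' [])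
    rw [hDr a' ha'] at this
    exact this
  · refine ⟨a, ha, ?_⟩
    have := countP_lt_len (fun o => o.isNone) (D.getD a []) b
      (by rw [hDr a ha]; exact hb)
      (by simp only [Option.isNone_eq_false_iff, Option.isSome_iff_ne_none]; exact hne)
    rw [hDr a ha] at this
    exact this

theorem jloop_zero (city : List (List Int)) (h w : Int) (D : List (List (Option Int))) :
    jloop city h w 0 D = D := rfl

theorem jloop_succ (city : List (List Int)) (h w : Int) (n : Nat)
    (D : List (List (Option Int))) :
    jloop city h w (n + 1) D =
      if (sweep city D h w).2 = true then jloop city h w n (sweep city D h w).1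
      else (sweep city D h w).1 := rfl

-- ---- the main simulation: level-BFS = Jacobi iteration + write-back ----
theorem jmain (H W : Nat) (g0 : List (List Int)) (D0 : List (List (Option Int)))
    (Hg0len : g0.length = H)
    (Hg0row : ∀ a : Nat, a < H → W ≤ (g0.getD a []).length)
    (HD0 : ∀ a b : Nat, a < H → b < W → DNt D0 a b = none ∨ DNt D0 a b = some 0) :
    ∀ (fuel : Nat) (k : Nat) (front : List (Int × Int)) (g : List (List Int))
      (vis : List (List Bool)) (D : List (List (Option Int))),
      JInv H W g0 D0 k g vis D front →
      (front ≠ [] → noneCount D < fuel) →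
      loopB (H : Int) (W : Int) front g vis (k : Int) =
        writeback (jloop g0 (H : Int) (W : Int) fuel D) g0 (H : Int) (W : Int) := by
  intro fuel
  induction fuel with
  | zero =>
    intro k front g vis D inv hb
    cases front with
    | nil =>
      rw [loopB_nil, jloop_zero]
      exact jinv_writeback H W g0 D0 k g vis D [] Hg0len Hg0row inv
    | cons c rest =>
      have := hb (by simp)
      omega
  | succ n ih =>
    intro k front g vis D inv hb
    obtain ⟨inv', hch, hmono, hwit, hid⟩ :=
      jstep H W g0 D0 k g vis D front Hg0len Hg0row HD0 inv
    cases front with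
    | nil =>
      have hR : roundB (H : Int) (W : Int) ((k : Int) + 1) [] g vis = (g, vis, []) := rfl
      have h1 : (sweep g0 D (H : Int) (W : Int)).2 ≠ true := by
        intro h
        have := hch.mp h
        rw [hR] at this
        exact this rfl
      have h2 := hid (by rw [hR])
      rw [loopB_nil, jloop_succ, if_neg h1, h2.1]
      exact jinv_writeback H W g0 D0 k g vis D [] Hg0len Hg0row inv
    | cons c rest =>
      rw [loopB_cons]
      by_cases hnil : (roundB (H : Int) (W : Int) ((k : Int) + 1) (c :: rest) g vis).2.2 = []
      · obtain ⟨hSD, hRg⟩ := hid hnil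
        have hch' : (sweep g0 D (H : Int) (W : Int)).2 ≠ true := fun h => (hch.mp h) hnil
        rw [hnil, loopB_nil, hRg, jloop_succ, if_neg hch', hSD]
        exact jinv_writeback H W g0 D0 k g vis D (c :: rest) Hg0len Hg0row inv
      · have hch' : (sweep g0 D (H : Int) (W : Int)).2 = true := hch.mpr hnil
        rw [jloop_succ, if_pos hch']
        have hlt : noneCount (sweep g0 D (H : Int) (W : Int)).1 < noneCount D :=
          noneCount_sweep_lt H W D (sweep g0 D (H : Int) (W : Int)).1 inv.dlen
            (fun a ha => inv.drow a ha) (sweep_len g0 D H W)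
            (fun a ha => sweep_row_len g0 D H W a ha) hmono (hwit hnil)
        have hb2 : noneCount D < n + 1 := hb (by simp)
        have := ih (k + 1) (roundB (H : Int) (W : Int) ((k : Int) + 1) (c :: rest) g vis).2.2
          (roundB (H : Int) (W : Int) ((k : Int) + 1) (c :: rest) g vis).1
          (roundB (H : Int) (W : Int) ((k : Int) + 1) (c :: rest) g vis).2.1
          (sweep g0 D (H : Int) (W : Int)).1 inv' (fun _ => by omega)
        rw [show ((k : Int) + 1) = (((k + 1 : Nat)) : Int) by push_cast; ring]
        exact this

-- ---- the initial states correspond ----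
theorem getD_replicate_lt {α : Type} (n i : Nat) (x d : α) (h : i < n) :
    (List.replicate n x).getD i d = x := by
  rw [List.getD_eq_getElem _ _ (by simpa using h)]
  simp

theorem getD_map_row {α β : Type} (g : List (List α)) (f : List α → List β) (a : Nat)
    (h : a < g.length) :
    (g.map f).getD a [] = f (g.getD a []) := by
  rw [List.getD_eq_getElem _ _ (by simpa using h), List.getD_eq_getElem _ _ h]
  simp

theorem seedRowB_firstZero (row : List Int) (i : Int) :
    ∀ js : List Int, seedRowB row i js =
      (match firstZero row js with
       | none => []
       | some j => [(i, j)]) := by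
  intro js
  induction js with
  | nil => rfl
  | cons j js ih =>
    rw [seedRowB, firstZero]
    by_cases h : row.getD j.toNat 0 = 0
    · rw [if_pos h, if_pos h]
    · rw [if_neg h, if_neg h, ih]

theorem firstZero_mem (row : List Int) :
    ∀ js : List Int, ∀ j : Int, firstZero row js = some j →
      j ∈ js ∧ row.getD j.toNat 0 = 0 := by
  intro js
  induction js with
  | nil => intro j h; exact absurd h (by simp [firstZero])
  | cons j' js ih =>
    intro j h
    rw [firstZero] at h
    by_cases h0 : row.getD j'.toNat 0 = 0
    · rw [if_pos h0] at h
      injection h with h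
      subst h
      exact ⟨by simp, h0⟩
    · rw [if_neg h0] at h
      obtain ⟨h1, h2⟩ := ih j h
      exact ⟨by simp [h1], h2⟩

theorem initRow_len (row : List Int) (W : Nat) : (initRow row (W : Int)).length = W := by
  unfold initRow
  cases firstZero row (PySem.List.pyRange 0 (W : Int) 1) with
  | none => simp
  | some j => simp

-- entry values of an initial row, and the link to the seed row
theorem initRow_entry (row : List Int) (W : Nat) (b : Nat) (hb : b < W) :
    ((initRow row (W : Int)).getD b none = some 0 ↔
      firstZero row (PySem.List.pyRange 0 (W : Int) 1) = some (b : Int)) ∧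
    ((initRow row (W : Int)).getD b none = none ∨
      ((initRow row (W : Int)).getD b none = some 0 ∧ row.getD b 0 = 0)) := by
  unfold initRow
  cases hfz : firstZero row (PySem.List.pyRange 0 (W : Int) 1) with
  | none =>
    have hn : (List.replicate (W : Int).toNat (none : Option Int)).getD b none = none := by
      rw [getD_replicate_lt _ _ _ _ (by simpa using hb)]
    constructor
    · rw [hn]
      constructor
      · intro h; exact absurd h (by simp)
      · intro h; exact absurd h (by simp)
    · left; exact hn
  | some j =>
    obtain ⟨hjmem, hj0⟩ := firstZero_mem row _ j hfz
    have hjb := PySem.List.mem_pyRange_one.mp hjmem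
    have hjW : j.toNat < W := by omega
    have hjcast : j = (j.toNat : Int) := (Int.toNat_of_nonneg hjb.1).symm
    by_cases hbj : b = j.toNat
    · have hself : ((List.replicate (W : Int).toNat (none : Option Int)).set j.toNat
          (some 0)).getD b none = some 0 := by
        rw [hbj]
        apply getD_set_self
        simpa using hjW
      constructor
      · rw [hself]
        constructor
        · intro _
          rw [hbj, ← hjcast]
        · intro _
          rfl
      · right
        refine ⟨hself, ?_⟩
        rw [hbj]
        exact hj0
    · have hother : ((List.replicate (W : Int).toNat (none : Option Int)).set j.toNat
          (some 0)).getD b none = none := by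
        rw [getD_set_ne _ _ _ _ _ (fun h => hbj h.symm),
          getD_replicate_lt _ _ _ _ (by simpa using hb)]
      constructor
      · rw [hother]
        constructor
        · intro h; exact absurd h (by simp)
        · intro h
          injection h with h
          exact absurd (by omega : b = j.toNat) hbj
      · left; exact hother

-- ---- initial coupling and final assembly ----
theorem pre_rows (city : List (List Int)) (hpre : Pre_solution city) :
    ∀ a : Nat, a < city.length →
      (city.headD []).length ≤ (city.getD a []).length := by
  intro a ha
  apply hpre.2
  rw [List.getD_eq_getElem _ _ ha]
  exact List.getElem_mem ha

theorem D0_row (city : List (List Int)) (a : Nat) (ha : a < city.length) :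
    (city.map (fun row => initRow row ((city.headD []).length : Int))).getD a [] =
      initRow (city.getD a []) ((city.headD []).length : Int) :=
  getD_map_row city _ a ha

theorem D0_char (city : List (List Int)) (a b : Nat) (ha : a < city.length)
    (hb : b < (city.headD []).length) :
    ((DNt (city.map (fun row => initRow row ((city.headD []).length : Int))) a b = some 0 ↔
      firstZero (city.getD a [])
        (PySem.List.pyRange 0 ((city.headD []).length : Int) 1) = some (b : Int)) ∧
    (DNt (city.map (fun row => initRow row ((city.headD []).length : Int))) a b = none ∨
      (DNt (city.map (fun row => initRow row ((city.headD []).length : Int))) a b = some 0 ∧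
        EN city a b = 0))) := by
  unfold DNt
  rw [D0_row city a ha]
  exact initRow_entry (city.getD a []) (city.headD []).length b hb

theorem seeds_sound (city : List (List Int)) :
    ∀ c ∈ seedsB city ((city.headD []).length : Int),
      ∃ a b : Nat, c = ((a : Int), (b : Int)) ∧ a < city.length ∧
        b < (city.headD []).length ∧
        DNt (city.map (fun row => initRow row ((city.headD []).length : Int))) a b = some 0 := by
  intro c hc
  unfold seedsB at hc
  simp only [List.mem_flatten, List.mem_map] at hc
  obtain ⟨l, ⟨p, hp, rfl⟩, hcl⟩ := hc
  rw [PySem.List.mem_enumerate_iff] at hp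
  obtain ⟨a, ha, rfl⟩ := hp
  rw [seedRowB_firstZero] at hcl
  simp only [zero_add] at hcl
  cases hfz : firstZero city[a] (PySem.List.pyRange 0 ((city.headD []).length : Int) 1) with
  | none => rw [hfz] at hcl; exact absurd hcl (List.not_mem_nil)
  | some j =>
    rw [hfz] at hcl
    simp only [List.mem_singleton] at hcl
    obtain ⟨hjmem, hj0⟩ := firstZero_mem _ _ j hfz
    have hjb := PySem.List.mem_pyRange_one.mp hjmem
    have hjcast : j = (j.toNat : Int) := (Int.toNat_of_nonneg hjb.1).symm
    refine ⟨a, j.toNat, hcl.trans (congrArg (fun z => (((a : Nat) : Int), z)) hjcast), ha, by omega, ?_⟩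
    have hgetD : city.getD a [] = city[a] := List.getD_eq_getElem _ _ ha
    apply ((D0_char city a j.toNat ha (by omega)).1).mpr
    rw [hgetD, ← hjcast]
    exact hfz

theorem seeds_comp (city : List (List Int)) (a b : Nat) (ha : a < city.length)
    (hb : b < (city.headD []).length)
    (hd : DNt (city.map (fun row => initRow row ((city.headD []).length : Int))) a b = some 0) :
    ((a : Int), (b : Int)) ∈ seedsB city ((city.headD []).length : Int) := by
  have hfz := ((D0_char city a b ha hb).1).mp hd
  unfold seedsB
  simp only [List.mem_flatten, List.mem_map]
  refine ⟨seedRowB city[a] ((a : Int)) (PySem.List.pyRange 0 ((city.headD []).length : Int) 1),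
    ⟨((a : Int), city[a]), ?_, rfl⟩, ?_⟩
  · rw [PySem.List.mem_enumerate_iff]
    exact ⟨a, ha, by simp⟩
  · rw [seedRowB_firstZero]
    have hgetD : city.getD a [] = city[a] := List.getD_eq_getElem _ _ ha
    rw [← hgetD, hfz]
    simp

theorem VN_vis0 (H W a b : Nat) (ha : a < H) (hb : b < W) :
    VN (List.replicate H (List.replicate W false)) a b = false := by
  unfold VN
  rw [getD_replicate_lt _ _ _ _ ha, getD_replicate_lt _ _ _ _ hb]

theorem jinv_init (city : List (List Int)) (hpre : Pre_solution city) :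
    JInv city.length (city.headD []).length city
      (city.map (fun row => initRow row ((city.headD []).length : Int))) 0 city
      (List.replicate city.length (List.replicate (city.headD []).length false))
      (city.map (fun row => initRow row ((city.headD []).length : Int)))
      (seedsB city ((city.headD []).length : Int)) := by
  refine ⟨sameShape_refl city, by simp, ?_, by simp, ?_, ?_, ?_, ?_, ?_, ?_, ?_, ?_, ?_⟩
  · intro a ha
    rw [D0_row city a ha, initRow_len]
  · intro a ha
    rw [getD_replicate_lt _ _ _ _ ha]
    simp
  · intro a b _ _
    rfl
  · intro a b _ _ _
    exact ⟨rfl, rfl⟩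
  · intro a b ha hb hW _
    exact ⟨VN_vis0 _ _ a b ha hb, hW⟩
  · intro a b v ha hb hW hv
    rcases (D0_char city a b ha hb).2 with hn | ⟨_, h0⟩
    · rw [hn] at hv; exact absurd hv (by simp)
    · rw [hW] at h0; exact absurd h0 (by norm_num)
  · intro c hc
    obtain ⟨a, b, rfl, ha, hb, hd⟩ := seeds_sound city c hc
    exact ⟨a, b, rfl, ha, hb, by rw [hd]; norm_num⟩
  · intro a b ha hb hd
    apply seeds_comp city a b ha hb
    rw [hd]
    norm_num
  · intro a b ha hb _ _ a' b' ha' hb' _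
    rcases (D0_char city a' b' ha' hb').2 with hn | ⟨h0, _⟩
    · exact Or.inl hn
    · right; rw [h0]; norm_num
  · intro a b v ha hb hW hv
    rcases (D0_char city a b ha hb).2 with hn | ⟨_, h0⟩
    · rw [hn] at hv; exact absurd hv (by simp)
    · rw [hW] at h0; exact absurd h0 (by norm_num)

-- ===== VERDICT (by name: the statement is the Claim_ definition above) =====
theorem solution_spec : Claim_equal_solution := by
  unfold Claim_equal_solution
  intro city _ hpre
  unfold Spec_solution
  rw [A_to_loopB city hpre]
  have hb : seedsB city ((city.headD []).length : Int) ≠ [] →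
      noneCount (city.map (fun row => initRow row ((city.headD []).length : Int))) <
        city.length * (city.headD []).length := by
    intro hne
    obtain ⟨c, hc⟩ := List.exists_mem_of_ne_nil _ hne
    obtain ⟨a, b, rfl, ha, hbW, hd⟩ := seeds_sound city c hc
    apply noneCount_lt_full
    · simp
    · intro a' ha'
      rw [D0_row city a' ha', initRow_len]
    · exact ⟨a, b, ha, hbW, by rw [hd]; exact Option.some_ne_none _⟩
  have hmain := jmain city.length (city.headD []).length city
    (city.map (fun row => initRow row ((city.headD []).length : Int))) rfl
    (pre_rows city hpre)
    (fun a b ha hbW => by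
      rcases (D0_char city a b ha hbW).2 with hn | ⟨h0, _⟩
      · exact Or.inl hn
      · exact Or.inr h0)
    (city.length * (city.headD []).length) 0
    (seedsB city ((city.headD []).length : Int)) city
    (List.replicate city.length (List.replicate (city.headD []).length false))
    (city.map (fun row => initRow row ((city.headD []).length : Int)))
    (jinv_init city hpre) hb
  rw [show (((0 : Nat)) : Int) = (0 : Int) from rfl] at hmain
  exact hmain
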